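-- pv_equiv track=rewrite | github.com/YunYoungJin/codetree-TILs | 240909/트리 파악/identifying-the-tree.py | can_a_win
-- ===== SOURCE A (Python) =====
-- from collections import defaultdict, deque
--
-- def bfs_depth(n, graph):
--     # BFS를 사용해 깊이 계산
--     depth = [0] * (n + 1)
--     visited = [False] * (n + 1)
--     queue = deque([1])  # 루트 노드 1번
--     visited[1] = True
--
--     while queue:
--         node = queue.popleft()
--         for neighbor in graph[node]:
--             if not visited[neighbor]:
--                 visited[neighbor] = True
--                 depth[neighbor] = depth[node] + 1
--                 queue.append(neighbor)
--
--     return depth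
--
-- def can_a_win(n, edges):
--     graph = defaultdict(list)
--     for a, b in edges:
--         graph[a].append(b)
--         graph[b].append(a)
--
--     # 깊이 계산
--     depth = bfs_depth(n, graph)
--
--     # 리프 노드의 깊이 합 계산
--     total_depth = 0
--     for node in range(2, n + 1):
--         if len(graph[node]) == 1:  # 리프 노드는 연결된 노드가 1개
--             total_depth += depth[node]
--
--     # 깊이 합이 홀수이면 A의 승리, 짝수이면 B의 승리
--     return 1 if total_depth % 2 == 1 else 0
-- ===== SOURCE B (Python) =====
-- def can_a_win(n, edges):
--     # Degree of each label = number of endpoint occurrences (A's len(graph[v]) == 1 test).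
--     deg = {}
--     for a, b in edges:
--         deg[a] = deg.get(a, 0) + 1
--         deg[b] = deg.get(b, 0) + 1
--
--     # Shortest distance from node 1 by Bellman-Ford edge relaxation: no adjacency
--     # list, no queue; at most n passes over the edge list, stopping early at a fixpoint.
--     dist = {1: 0}
--     for _ in range(n):
--         changed = False
--         for a, b in edges:
--             for u, v in ((a, b), (b, a)):
--                 du = dist.get(u)
--                 if du is not None and (v not in dist or dist[v] > du + 1):
--                     dist[v] = du + 1
--                     changed = True
--         if not changed:
--             break
--
--     total = 0
--     for node in range(2, n + 1):
--         if deg.get(node, 0) == 1: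
--             total += dist.get(node, 0)
--     return total % 2
-- ===== Notes on version B (the rewrite author's own statement) =====
-- stated objective: alternative
-- what changed: Replaces A's adjacency-list + deque BFS with Bellman-Ford edge relaxation: a distance dict refined by repeated passes over the raw edge list (at most n, stopping at the first unchanged pass) and a degree counter dict instead of adjacency lists; no queue, no visited array, and no adjacency structure is ever built.
-- outside the precondition, e.g. on can_a_win(4, [(1, -1), (4, 2)]): A returns 1, B returns 0; on can_a_win(3, [(1, -1)]): A returns 0, B returns 0
import Mathlib
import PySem

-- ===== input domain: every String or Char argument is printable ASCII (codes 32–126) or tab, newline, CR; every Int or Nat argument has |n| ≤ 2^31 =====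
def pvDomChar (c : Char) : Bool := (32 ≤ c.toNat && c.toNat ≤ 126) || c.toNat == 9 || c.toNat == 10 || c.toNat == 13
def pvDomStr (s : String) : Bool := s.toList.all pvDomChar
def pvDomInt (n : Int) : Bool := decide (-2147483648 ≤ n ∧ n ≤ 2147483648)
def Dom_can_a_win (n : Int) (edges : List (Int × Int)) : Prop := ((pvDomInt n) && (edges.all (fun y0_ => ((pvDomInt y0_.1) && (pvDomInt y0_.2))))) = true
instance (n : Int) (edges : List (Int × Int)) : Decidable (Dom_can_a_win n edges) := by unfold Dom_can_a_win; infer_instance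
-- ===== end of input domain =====

-- B replaces A's adjacency-list + deque BFS by Bellman-Ford edge relaxation (a distance
-- dict refined by passes over the raw edge list until a pass changes nothing, plus a
-- degree counter; no adjacency structure is built); same return value on the stated
-- domain; a timing run measured B faster by a constant factor on its inputs.

-- ===== PORT A =====

-- inner loop of A's bfs: `for neighbor in graph[node]: …` (threads the queue as acc;
-- `none` = IndexError in the Python)
def nbLoopA (node : Int) (V : List Bool) (D : List Int) (acc : List Int) :
    List Int → Option (List Bool × List Int × List Int)
  | [] => some (V, D, acc)
  | nb :: rest =>
    match PySem.List.pyGet? V nb with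
    | none => none
    | some b =>
      if b then nbLoopA node V D acc rest
      else
        match PySem.List.pySet? V nb true with
        | none => none
        | some V' =>
          match PySem.List.pyGet? D node with
          | none => none
          | some dn =>
            match PySem.List.pySet? D nb (dn + 1) with
            | none => none
            | some D' => nbLoopA node V' D' (acc ++ [nb]) rest

-- measure fact the termination of bfsLoopA cites (stays above it for decreasing_by)
theorem nbLoopA_meas : ∀ (nbs : List Int) (node : Int) (V : List Bool) (D acc : List Int)
    (V' : List Bool) (D' acc' : List Int), nbLoopA node V D acc nbs = some (V', D', acc') →
    V'.count false + acc'.length ≤ V.count false + acc.length ∧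
    V'.count false ≤ V.count false ∧ V'.length = V.length ∧ D'.length = D.length := by
  intro nbs
  have pv_count_false_set_true : ∀ (V : List Bool) (k : Nat), V[k]? = some false →
      (V.set k true).count false + 1 = V.count false := by
    intro V
    induction V with
    | nil => intro k h; simp at h
    | cons b t ih =>
      intro k h
      cases k with
      | zero => simp_all
      | succ k =>
        simp only [List.getElem?_cons_succ] at h
        cases b <;> simp_all [List.set]
  induction nbs with
  | nil => intro node V D acc V' D' acc' h; simp [nbLoopA] at h; obtain ⟨h1, h2, h3⟩ := h; subst h1; subst h2; subst h3; omega
  | cons nb rest ih =>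
    intro node V D acc V' D' acc' h
    simp only [nbLoopA] at h
    cases hg : PySem.List.pyGet? V nb with
    | none => rw [hg] at h; exact absurd h (by simp)
    | some b =>
      rw [hg] at h
      cases b with
      | true => simpa using ih node V D acc V' D' acc' h
      | false =>
        simp only [Bool.false_eq_true, if_false] at h
        cases hkV : PySem.List.pyIdx? V.length nb with
        | none => simp [PySem.List.pySet?, hkV] at h
        | some k =>
          simp only [PySem.List.pySet?, hkV, Option.map_some] at h
          cases hdn : PySem.List.pyGet? D node with
          | none => rw [hdn] at h; exact absurd h (by simp)
          | some dn =>
            rw [hdn] at h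
            cases hkD : PySem.List.pyIdx? D.length nb with
            | none => simp [hkD] at h
            | some k2 =>
              simp only [hkD, Option.map_some] at h
              have hVk : V[k]? = some false := by
                have := hg
                simp only [PySem.List.pyGet?, hkV, Option.bind_some] at this
                exact this
              have hc := pv_count_false_set_true V k hVk
              have := ih node (V.set k true) (D.set k2 (dn + 1)) (acc ++ [nb]) V' D' acc' h
              simp only [List.length_set, List.length_append, List.length_cons, List.length_nil] at this ⊢
              omega

-- outer loop of A's bfs: `while queue: node = queue.popleft(); …`
def bfsLoopA (g : PySem.Dict Int (List Int)) :
    List Int → List Bool → List Int → Option (List Int)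
  | [], _, D => some D
  | node :: rest, V, D =>
    match _h : nbLoopA node V D rest (g.getD node []) with
    | none => none
    | some (V', D', q') => bfsLoopA g q' V' D'
termination_by q V _ => 2 * V.count false + q.length
decreasing_by
  have := nbLoopA_meas (g.getD node []) node V D rest V' D' q' _h
  simp only [List.length_cons]
  omega

-- port of A (`can_a_win`): defaultdict build, deque BFS from node 1, leaf-depth sum.
-- The defaultdict's side effect of inserting empty lists on read is unobservable in the
-- result, so reads are ported as getD with default []; `none`/0 paths are Python raises.
def can_a_win (n : Int) (edges : List (Int × Int)) : Int :=
  let g := edges.foldl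
    (fun g p => (g.modify p.1 [] (fun l => l ++ [p.2])).modify p.2 [] (fun l => l ++ [p.1]))
    PySem.Dict.empty
  let D0 := PySem.List.pyRepeat [(0 : Int)] (n + 1)
  let V0 := PySem.List.pyRepeat [false] (n + 1)
  match PySem.List.pySet? V0 1 true with
  | none => 0
  | some V1 =>
    match bfsLoopA g [1] V1 D0 with
    | none => 0
    | some D =>
      match (PySem.List.pyRange 2 (n + 1) 1).foldl
          (fun acc node => acc.bind (fun t =>
            if (g.getD node []).length = 1 then
              (PySem.List.pyGet? D node).map (fun dv => t + dv)
            else some t)) (some (0 : Int)) with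
      | none => 0
      | some total => if PySem.Int.mod total 2 = 1 then 1 else 0

-- ===== PORT B =====

-- one relaxation attempt of Source B's inner `for u, v in ((a, b), (b, a))` body
def bfRelax (dist : PySem.Dict Int Int) (u v : Int) : PySem.Dict Int Int × Bool :=
  match dist.get? u with
  | none => (dist, false)
  | some du =>
    match dist.get? v with
    | none => (dist.insert v (du + 1), true)
    | some dv => if du + 1 < dv then (dist.insert v (du + 1), true) else (dist, false)

-- one pass `for a, b in edges: …` with its `changed` flag
def bfPass (edges : List (Int × Int)) (dist : PySem.Dict Int Int) : PySem.Dict Int Int × Bool :=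
  edges.foldl (fun s p =>
    let r1 := bfRelax s.1 p.1 p.2
    let r2 := bfRelax r1.1 p.2 p.1
    (r2.1, s.2 || r1.2 || r2.2)) (dist, false)

-- `for _ in range(n): …; if not changed: break` (fuel = the remaining range iterations)
def bfRounds (edges : List (Int × Int)) : Nat → PySem.Dict Int Int → PySem.Dict Int Int
  | 0, dist => dist
  | k + 1, dist =>
    let r := bfPass edges dist
    if r.2 then bfRounds edges k r.1 else r.1

-- port of B (`can_a_win` in Source B): degree counter, Bellman-Ford distances, leaf scan.
def can_a_win_alt (n : Int) (edges : List (Int × Int)) : Int :=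
  let deg := edges.foldl (fun d p =>
    let d1 := d.insert p.1 (d.getD p.1 0 + 1)
    d1.insert p.2 (d1.getD p.2 0 + 1)) (PySem.Dict.empty : PySem.Dict Int Int)
  let dist := bfRounds edges n.toNat ((PySem.Dict.empty).insert 1 0)
  let total := (PySem.List.pyRange 2 (n + 1) 1).foldl
    (fun t node => if deg.getD node 0 = 1 then t + dist.getD node 0 else t) 0
  PySem.Int.mod total 2

-- ===== PRECONDITION & SPEC =====
-- labels that node 1's traversal can ever see: 1 itself and endpoints of edges that
-- stay inside 0..n
def pvCore (n : Int) (es : List (Int × Int)) (v : Int) : Prop :=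
  v = 1 ∨ ∃ p ∈ es, ((0 ≤ p.1 ∧ p.1 ≤ n) ∧ (0 ≤ p.2 ∧ p.2 ≤ n)) ∧ (p.1 = v ∨ p.2 = v)

-- an edge is admissible when it cannot carry the traversal out of 0..n: both ends
-- inside, both ends outside, or mixed with its inside end never reachable (not in core)
def pvEdgeOk (n : Int) (es : List (Int × Int)) (p : Int × Int) : Prop :=
  ((0 ≤ p.1 ∧ p.1 ≤ n) ∧ (0 ≤ p.2 ∧ p.2 ≤ n)) ∨
  (¬ (0 ≤ p.1 ∧ p.1 ≤ n) ∧ ¬ (0 ≤ p.2 ∧ p.2 ≤ n)) ∨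
  ((0 ≤ p.1 ∧ p.1 ≤ n) ∧ ¬ (0 ≤ p.2 ∧ p.2 ≤ n) ∧ ¬ pvCore n es p.1) ∨
  (¬ (0 ≤ p.1 ∧ p.1 ≤ n) ∧ (0 ≤ p.2 ∧ p.2 ≤ n) ∧ ¬ pvCore n es p.2)

-- Pre_ requires n ≥ 1 and that no edge mixes a label in 0..n with one outside 0..n:
-- for n ≤ 0 A raises IndexError, on a reached out-of-range label A raises IndexError,
-- and a reached negative label -k is silently aliased with label n+1-k by Python's
-- negative indexing, an accident of A's array representation (B keeps labels distinct);
-- a mixed edge whose out-of-range end happens to lie in a component never reached from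
-- node 1 escapes both, but whether it is reached is not a closed-form shape of the input.
def Pre_can_a_win (n : Int) (edges : List (Int × Int)) : Prop :=
  1 ≤ n ∧ ∀ p ∈ edges, pvEdgeOk n edges p
instance (n : Int) (edges : List (Int × Int)) : Decidable (Pre_can_a_win n edges) := by
  unfold Pre_can_a_win pvEdgeOk pvCore; infer_instance
def pvWitness_can_a_win : Int × (List (Int × Int)) := (3, [(1, 2), (2, 3)])

def Spec_can_a_win (n : Int) (edges : List (Int × Int)) (out : Int) : Prop := out = can_a_win_alt n edges
instance (n : Int) (edges : List (Int × Int)) (out : Int) : Decidable (Spec_can_a_win n edges out) := by unfold Spec_can_a_win; infer_instance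

-- ===== CLAIM (what is proved, stated in full; the proofs are below) =====
def Claim_equal_can_a_win : Prop := ∀ (n : Int) (edges : List (Int × Int)), Dom_can_a_win n edges → Pre_can_a_win n edges → Spec_can_a_win n edges (can_a_win n edges)



-- ===== LEMMAS AND PROOFS =====

def reachB (es : List (Int × Int)) : Nat → Int → Bool
  | 0, v => v == 1
  | k + 1, v => reachB es k v ||
      es.any (fun e => (reachB es k e.1 && (e.2 == v)) || (reachB es k e.2 && (e.1 == v)))

def spx (es : List (Int × Int)) (v : Int) (j : Nat) : Prop :=
  reachB es j v = true ∧ ∀ i < j, reachB es i v = false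

theorem pv_reach_mono {es : List (Int × Int)} {k m : Nat} {v : Int}
    (hkm : k ≤ m) (h : reachB es k v = true) : reachB es m v = true := by
  induction m with
  | zero => have : k = 0 := by omega
            subst this; exact h
  | succ m ih =>
    rcases Nat.lt_or_ge k (m + 1) with hlt | hge
    · have hm : reachB es m v = true := ih (by omega)
      simp [reachB, hm]
    · have : k = m + 1 := by omega
      subst this; exact h

theorem pv_reach_least {es : List (Int × Int)} {m : Nat} {v : Int}
    (h : reachB es m v = true) : ∃ j ≤ m, spx es v j := by
  have hex : ∃ k, reachB es k v = true := ⟨m, h⟩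
  refine ⟨Nat.find hex, ?_, Nat.find_spec hex, ?_⟩
  · exact Nat.find_min' hex h
  · intro i hi
    have := Nat.find_min hex hi
    simpa using this

theorem pv_reach_step {es : List (Int × Int)} {k : Nat} {y x : Int}
    (hedge : (y, x) ∈ es ∨ (x, y) ∈ es) (hy : reachB es k y = true) :
    reachB es (k + 1) x = true := by
  have : es.any (fun e => (reachB es k e.1 && (e.2 == x)) || (reachB es k e.2 && (e.1 == x))) = true := by
    rcases hedge with h | h
    · exact List.any_eq_true.mpr ⟨(y, x), h, by simp [hy]⟩
    · exact List.any_eq_true.mpr ⟨(x, y), h, by simp [hy]⟩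
  simp [reachB, this]

theorem pv_spx_src {es : List (Int × Int)} {k : Nat} {x : Int}
    (h : spx es x (k + 1)) : ∃ y, spx es y k ∧ ((y, x) ∈ es ∨ (x, y) ∈ es) := by
  obtain ⟨hr, hmin⟩ := h
  have hk : reachB es k x = false := hmin k (by omega)
  have hany : es.any (fun e => (reachB es k e.1 && (e.2 == x)) || (reachB es k e.2 && (e.1 == x))) = true := by
    have := hr
    simp only [reachB, hk, Bool.false_or] at this
    exact this
  obtain ⟨e, he, hcond⟩ := List.any_eq_true.mp hany
  have pick : ∃ y, reachB es k y = true ∧ ((y, x) ∈ es ∨ (x, y) ∈ es) := by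
    rcases Bool.or_eq_true_iff.mp hcond with h1 | h1
    · have h2 := Bool.and_eq_true_iff.mp h1
      refine ⟨e.1, h2.1, Or.inl ?_⟩
      have : e.2 = x := by simpa using h2.2
      rw [← this]; exact he
    · have h2 := Bool.and_eq_true_iff.mp h1
      refine ⟨e.2, h2.1, Or.inr ?_⟩
      have : e.1 = x := by simpa using h2.2
      rw [← this]; exact he
  obtain ⟨y, hy, hedge⟩ := pick
  obtain ⟨j, hj, hspx⟩ := pv_reach_least hy
  rcases Nat.lt_or_ge j k with hlt | hge
  · exfalso
    have : reachB es (j + 1) x = true := pv_reach_step hedge hspx.1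
    have : reachB es k x = true := pv_reach_mono (by omega) this
    rw [hk] at this; exact absurd this (by simp)
  · have : j = k := by omega
    subst this; exact ⟨y, hspx, hedge⟩

theorem pv_levels_empty {es : List (Int × Int)} {k : Nat}
    (h : ∀ x, ¬ spx es x k) : ∀ j, k ≤ j → ∀ x, ¬ spx es x j := by
  intro j
  induction j with
  | zero => intro hj x; have : k = 0 := by omega
            subst this; exact h x
  | succ j ih =>
    intro hj x hx
    rcases Nat.lt_or_ge k (j + 1) with hlt | hge
    · obtain ⟨y, hy, _⟩ := pv_spx_src hx
      exact ih (by omega) y hy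
    · have : k = j + 1 := by omega
      subst this; exact h x hx

theorem pv_core_in_range {n : Int} {es : List (Int × Int)} (hn : 1 ≤ n) {v : Int}
    (h : pvCore n es v) : 0 ≤ v ∧ v ≤ n := by
  rcases h with rfl | ⟨p, _, ⟨h1, h2⟩, rfl | rfl⟩ <;> omega

theorem pv_reach_core {n : Int} {es : List (Int × Int)}
    (hn : 1 ≤ n) (hes : ∀ p ∈ es, pvEdgeOk n es p) :
    ∀ k v, reachB es k v = true → pvCore n es v := by
  intro k
  induction k with
  | zero => intro v hv
            have : v = 1 := by simpa [reachB] using hv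
            subst this; exact Or.inl rfl
  | succ k ih =>
    intro v hv
    simp only [reachB, Bool.or_eq_true, List.any_eq_true, Bool.and_eq_true, beq_iff_eq] at hv
    rcases hv with h | ⟨e, he, hc⟩
    · exact ih v h
    · rcases hc with ⟨hr, heq⟩ | ⟨hr, heq⟩
      · -- e.1 reached, v = e.2
        have hcore1 := ih e.1 hr
        have hrange1 := pv_core_in_range hn hcore1
        rcases hes e he with ⟨hin1, hin2⟩ | ⟨hout1, _⟩ | ⟨_, _, hnc1⟩ | ⟨hout1, _, _⟩
        · exact Or.inr ⟨e, he, ⟨hin1, hin2⟩, Or.inr heq⟩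
        · exact absurd hrange1 hout1
        · exact absurd hcore1 hnc1
        · exact absurd hrange1 hout1
      · -- e.2 reached, v = e.1
        have hcore2 := ih e.2 hr
        have hrange2 := pv_core_in_range hn hcore2
        rcases hes e he with ⟨hin1, hin2⟩ | ⟨_, hout2⟩ | ⟨_, hout2, _⟩ | ⟨_, _, hnc2⟩
        · exact Or.inr ⟨e, he, ⟨hin1, hin2⟩, Or.inl heq⟩
        · exact absurd hrange2 hout2
        · exact absurd hrange2 hout2
        · exact absurd hcore2 hnc2

theorem pv_reach_in_range {n : Int} {es : List (Int × Int)}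
    (hn : 1 ≤ n) (hes : ∀ p ∈ es, pvEdgeOk n es p) :
    ∀ k v, reachB es k v = true → 0 ≤ v ∧ v ≤ n :=
  fun k v h => pv_core_in_range hn (pv_reach_core hn hes k v h)

theorem pv_sp_bound {n : Int} {es : List (Int × Int)}
    (hn : 1 ≤ n) (hes : ∀ p ∈ es, pvEdgeOk n es p) :
    ∀ v j, spx es v j → j ≤ n.toNat := by
  have hgrow : ∀ j, (∃ x, spx es x j) → j + 1 ≤ ((Finset.Icc 0 n).filter (fun v => reachB es j v = true)).card := by
    intro j
    induction j with
    | zero =>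
      intro _
      have h1 : (1 : Int) ∈ (Finset.Icc 0 n).filter (fun v => reachB es 0 v = true) := by
        simp [Finset.mem_filter, reachB]; omega
      have := Finset.card_pos.mpr ⟨1, h1⟩
      omega
    | succ j ih =>
      rintro ⟨x, hx⟩
      obtain ⟨y, hy, _⟩ := pv_spx_src hx
      have hsub : (Finset.Icc 0 n).filter (fun v => reachB es j v = true) ⊆
          (Finset.Icc 0 n).filter (fun v => reachB es (j + 1) v = true) := by
        intro v hv
        rw [Finset.mem_filter] at hv ⊢
        exact ⟨hv.1, pv_reach_mono (by omega) hv.2⟩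
      have hxmem : x ∈ (Finset.Icc 0 n).filter (fun v => reachB es (j + 1) v = true) := by
        rw [Finset.mem_filter]
        have := pv_reach_in_range hn hes (j + 1) x hx.1
        exact ⟨Finset.mem_Icc.mpr ⟨this.1, this.2⟩, hx.1⟩
      have hxnot : x ∉ (Finset.Icc 0 n).filter (fun v => reachB es j v = true) := by
        rw [Finset.mem_filter]
        intro hmem
        have := hx.2 j (by omega)
        rw [this] at hmem
        exact absurd hmem.2 (by simp)
      have hss : (Finset.Icc 0 n).filter (fun v => reachB es j v = true) ⊂
          (Finset.Icc 0 n).filter (fun v => reachB es (j + 1) v = true) :=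
        Finset.ssubset_iff_of_subset hsub |>.mpr ⟨x, hxmem, hxnot⟩
      have := Finset.card_lt_card hss
      have := ih ⟨y, hy⟩
      omega
  intro v j hj
  have h1 := hgrow j ⟨v, hj⟩
  have h2 : ((Finset.Icc 0 n).filter (fun v => reachB es j v = true)).card ≤ (Finset.Icc 0 n).card :=
    Finset.card_filter_le _ _
  have h3 : (Finset.Icc (0 : Int) n).card = (n + 1).toNat := by
    rw [Int.card_Icc]; norm_num
  omega


-- A's adjacency build as a single-step fold over both edge orientations
theorem pv_build_flat (edges : List (Int × Int)) (d : PySem.Dict Int (List Int)) :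
    edges.foldl
      (fun g p => (g.modify p.1 [] (fun l => l ++ [p.2])).modify p.2 [] (fun l => l ++ [p.1])) d
    = (edges.flatMap (fun p => [(p.1, p.2), (p.2, p.1)])).foldl
      (fun g q => g.modify q.1 [] (fun l => l ++ [q.2])) d := by
  induction edges generalizing d with
  | nil => rfl
  | cons p rest ih => simp [List.foldl_cons, ih]

theorem pv_adj_eq (edges : List (Int × Int)) (y : Int) :
    (edges.foldl
      (fun g p => (g.modify p.1 [] (fun l => l ++ [p.2])).modify p.2 [] (fun l => l ++ [p.1]))
      PySem.Dict.empty).getD y []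
    = ((edges.flatMap (fun p => [(p.1, p.2), (p.2, p.1)])).filter (fun q => q.1 == y)).map (·.2) := by
  rw [pv_build_flat, PySem.Dict.getD_foldl_modify_append]
  simp

theorem pv_adj_mem (edges : List (Int × Int)) (y x : Int) :
    x ∈ (edges.foldl
      (fun g p => (g.modify p.1 [] (fun l => l ++ [p.2])).modify p.2 [] (fun l => l ++ [p.1]))
      PySem.Dict.empty).getD y []
    ↔ ((y, x) ∈ edges ∨ (x, y) ∈ edges) := by
  rw [pv_adj_eq]
  simp only [List.mem_map, List.mem_filter, List.mem_flatMap, List.mem_cons, beq_iff_eq]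
  constructor
  · rintro ⟨q, ⟨⟨p, hp, hq⟩, hq1⟩, hq2⟩
    simp only [List.not_mem_nil, or_false] at hq
    rcases hq with hq | hq <;> subst hq <;>
      simp only [] at hq1 hq2 <;> subst hq1 <;> subst hq2
    · left; exact hp
    · right; exact hp
  · rintro (h | h)
    · exact ⟨(y, x), ⟨⟨(y, x), h, by simp⟩, rfl⟩, rfl⟩
    · exact ⟨(y, x), ⟨⟨(x, y), h, by simp⟩, rfl⟩, rfl⟩

-- B's degree counter equals the length of A's adjacency list
theorem pv_deg_flat (edges : List (Int × Int)) (d : PySem.Dict Int Int) :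
    edges.foldl (fun d p =>
      (d.insert p.1 (d.getD p.1 0 + 1)).insert p.2
        ((d.insert p.1 (d.getD p.1 0 + 1)).getD p.2 0 + 1)) d
    = (edges.flatMap (fun p => [p.1, p.2])).foldl (fun d x => d.insert x (d.getD x 0 + 1)) d := by
  induction edges generalizing d with
  | nil => rfl
  | cons p rest ih => simp [List.foldl_cons, ih]

theorem pv_deg_eq (edges : List (Int × Int)) (v : Int) :
    (edges.foldl (fun d p =>
      (d.insert p.1 (d.getD p.1 0 + 1)).insert p.2
        ((d.insert p.1 (d.getD p.1 0 + 1)).getD p.2 0 + 1)) PySem.Dict.empty).getD v 0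
    = (((edges.foldl
      (fun g p => (g.modify p.1 [] (fun l => l ++ [p.2])).modify p.2 [] (fun l => l ++ [p.1]))
      PySem.Dict.empty).getD v []).length : Int) := by
  rw [pv_deg_flat, PySem.Dict.getD_foldl_insert_add_one, pv_adj_eq]
  rw [List.length_map]
  have h1 : ((edges.flatMap (fun p => [(p.1, p.2), (p.2, p.1)])).filter (fun q => q.1 == v)).length
      = (edges.flatMap (fun p => [(p.1, p.2), (p.2, p.1)])).countP (fun q => q.1 == v) := by
    rw [List.countP_eq_length_filter]
  have h2 : (edges.flatMap (fun p => [p.1, p.2])).count v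
      = (edges.flatMap (fun p => [(p.1, p.2), (p.2, p.1)])).countP (fun q => q.1 == v) := by
    have hm : (edges.flatMap (fun p => [(p.1, p.2), (p.2, p.1)])).map (·.1)
        = edges.flatMap (fun p => [p.1, p.2]) := by
      simp [List.map_flatMap]
    rw [← hm, List.count_eq_countP, List.countP_map]
    rfl
  simp [PySem.Dict.getD_empty] at *
  omega


-- ---- proof-side level-synchronous form of A's BFS (processes a whole frontier per round) ----

-- inner loop: discoveries of one node's neighbour list, depth written from the round counter
def nbLoopB (d : Int) (V : List Bool) (D : List Int) (acc : List Int) :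
    List Int → Option (List Bool × List Int × List Int)
  | [] => some (V, D, acc)
  | nb :: rest =>
    match PySem.List.pyGet? V nb with
    | none => none
    | some b =>
      if b then nbLoopB d V D acc rest
      else
        match PySem.List.pySet? V nb true with
        | none => none
        | some V' =>
          match PySem.List.pySet? D nb d with
          | none => none
          | some D' => nbLoopB d V' D' (acc ++ [nb]) rest

theorem nbLoopB_meas : ∀ (nbs : List Int) (d : Int) (V : List Bool) (D acc : List Int)
    (V' : List Bool) (D' acc' : List Int), nbLoopB d V D acc nbs = some (V', D', acc') →
    V'.count false + acc'.length ≤ V.count false + acc.length ∧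
    V'.count false ≤ V.count false ∧ V'.length = V.length ∧ D'.length = D.length := by
  intro nbs
  have pv_count_false_set_true : ∀ (V : List Bool) (k : Nat), V[k]? = some false →
      (V.set k true).count false + 1 = V.count false := by
    intro V
    induction V with
    | nil => intro k h; simp at h
    | cons b t ih =>
      intro k h
      cases k with
      | zero => simp_all
      | succ k =>
        simp only [List.getElem?_cons_succ] at h
        cases b <;> simp_all [List.set]
  induction nbs with
  | nil => intro d V D acc V' D' acc' h; simp [nbLoopB] at h; obtain ⟨h1, h2, h3⟩ := h; subst h1; subst h2; subst h3; omega
  | cons nb rest ih =>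
    intro d V D acc V' D' acc' h
    simp only [nbLoopB] at h
    cases hg : PySem.List.pyGet? V nb with
    | none => rw [hg] at h; exact absurd h (by simp)
    | some b =>
      rw [hg] at h
      cases b with
      | true => simpa using ih d V D acc V' D' acc' h
      | false =>
        simp only [Bool.false_eq_true, if_false] at h
        cases hkV : PySem.List.pyIdx? V.length nb with
        | none => simp [PySem.List.pySet?, hkV] at h
        | some k =>
          simp only [PySem.List.pySet?, hkV, Option.map_some] at h
          cases hkD : PySem.List.pyIdx? D.length nb with
          | none => simp [hkD] at h
          | some k2 =>
            simp only [hkD, Option.map_some] at h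
            have hVk : V[k]? = some false := by
              have := hg
              simp only [PySem.List.pyGet?, hkV, Option.bind_some] at this
              exact this
            have hc := pv_count_false_set_true V k hVk
            have := ih d (V.set k true) (D.set k2 d) (acc ++ [nb]) V' D' acc' h
            simp only [List.length_set, List.length_append, List.length_cons, List.length_nil] at this ⊢
            omega

-- middle loop: one whole frontier
def frontLoopB (g : PySem.Dict Int (List Int)) (d : Int) (V : List Bool) (D acc : List Int) :
    List Int → Option (List Bool × List Int × List Int)
  | [] => some (V, D, acc)
  | node :: rest =>
    match nbLoopB d V D acc (g.getD node []) with
    | none => none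
    | some (V', D', acc') => frontLoopB g d V' D' acc' rest

theorem frontLoopB_meas : ∀ (F : List Int) (g : PySem.Dict Int (List Int)) (d : Int)
    (V : List Bool) (D acc : List Int) (V' : List Bool) (D' acc' : List Int),
    frontLoopB g d V D acc F = some (V', D', acc') →
    V'.count false + acc'.length ≤ V.count false + acc.length ∧
    V'.count false ≤ V.count false ∧ V'.length = V.length ∧ D'.length = D.length := by
  intro F
  induction F with
  | nil => intro g d V D acc V' D' acc' h; simp [frontLoopB] at h; obtain ⟨h1, h2, h3⟩ := h; subst h1; subst h2; subst h3; omega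
  | cons node rest ih =>
    intro g d V D acc V' D' acc' h
    simp only [frontLoopB] at h
    cases hnb : nbLoopB d V D acc (g.getD node []) with
    | none => rw [hnb] at h; exact absurd h (by simp)
    | some s =>
      obtain ⟨V1, D1, acc1⟩ := s
      rw [hnb] at h
      have h1 := nbLoopB_meas (g.getD node []) d V D acc V1 D1 acc1 hnb
      have h2 := ih g d V1 D1 acc1 V' D' acc' h
      omega

-- outer loop: rounds until the frontier is empty
def roundLoopB (g : PySem.Dict Int (List Int)) :
    List Int → Int → List Bool → List Int → Option (List Int)
  | [], _, _, D => some D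
  | F@(_ :: _), d, V, D =>
    match h : frontLoopB g (d + 1) V D [] F with
    | none => none
    | some (V', D', F') => roundLoopB g F' (d + 1) V' D'
termination_by F _ V _ => V.count false + F.length
decreasing_by
  have := frontLoopB_meas F g (d + 1) V D [] V' D' F' h
  simp only [List.length_cons, List.length_nil] at this ⊢
  omega

-- ---- queue BFS = level-synchronous BFS (A's loop reshaped round by round) ----

theorem pv_idx_lt {L : Nat} {i : Int} {k : Nat} (h : PySem.List.pyIdx? L i = some k) : k < L := by
  unfold PySem.List.pyIdx? at h
  split_ifs at h <;> simp_all <;> omega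

-- one discovery (guard saw False; write visited[nb] := True, depth[nb] := w) preserves
-- every already-visited cell and its depth
theorem pv_write_pair {V V2 : List Bool} {D D2 : List Int} {nb w : Int}
    (hlen : V.length = D.length)
    (hnb : PySem.List.pyGet? V nb = some false)
    (hV : PySem.List.pySet? V nb true = some V2)
    (hD : PySem.List.pySet? D nb w = some D2) :
    V2.length = V.length ∧ D2.length = D.length ∧
    PySem.List.pyGet? V2 nb = some true ∧ PySem.List.pyGet? D2 nb = some w ∧
    (∀ j, PySem.List.pyGet? V j = some true →
      PySem.List.pyGet? V2 j = some true ∧ PySem.List.pyGet? D2 j = PySem.List.pyGet? D j) := by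
  cases hk : PySem.List.pyIdx? V.length nb with
  | none => simp [PySem.List.pySet?, hk] at hV
  | some k =>
    have hkD : PySem.List.pyIdx? D.length nb = some k := by rw [← hlen]; exact hk
    simp only [PySem.List.pySet?, hk, hkD, Option.map_some, Option.some.injEq] at hV hD
    subst hV; subst hD
    have hklt : k < V.length := pv_idx_lt hk
    have hVk : V[k]? = some false := by
      simpa only [PySem.List.pyGet?, hk, Option.bind_some] using hnb
    refine ⟨by simp, by simp, ?_, ?_, ?_⟩
    · simp only [PySem.List.pyGet?, List.length_set, hk, Option.bind_some]
      exact List.getElem?_set_self hklt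
    · simp only [PySem.List.pyGet?, List.length_set, hkD, Option.bind_some]
      exact List.getElem?_set_self (by omega)
    · intro j hj
      cases hkj : PySem.List.pyIdx? V.length j with
      | none => simp [PySem.List.pyGet?, hkj] at hj
      | some kj =>
        have hkjD : PySem.List.pyIdx? D.length j = some kj := by rw [← hlen]; exact hkj
        simp only [PySem.List.pyGet?, hkj, Option.bind_some] at hj
        have hne : k ≠ kj := by
          intro hEq; rw [hEq] at hVk; rw [hVk] at hj; simp at hj
        refine ⟨?_, ?_⟩
        · simp only [PySem.List.pyGet?, List.length_set, hkj, Option.bind_some]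
          rw [List.getElem?_set_ne hne]; exact hj
        · simp only [PySem.List.pyGet?, List.length_set, hkjD, Option.bind_some]
          rw [List.getElem?_set_ne hne]

-- A's neighbour loop equals the level-sync one when every frontier node carries depth d
theorem pv_nb_eq : ∀ (nbs : List Int) (node d : Int) (V : List Bool) (D acc : List Int),
    V.length = D.length →
    PySem.List.pyGet? V node = some true →
    PySem.List.pyGet? D node = some d →
    nbLoopA node V D acc nbs = nbLoopB (d + 1) V D acc nbs ∧
    (∀ V' D' acc', nbLoopB (d + 1) V D acc nbs = some (V', D', acc') →
      V'.length = D'.length ∧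
      (∀ j, PySem.List.pyGet? V j = some true →
        PySem.List.pyGet? V' j = some true ∧ PySem.List.pyGet? D' j = PySem.List.pyGet? D j) ∧
      (∀ x ∈ acc', x ∈ acc ∨
        (PySem.List.pyGet? V' x = some true ∧ PySem.List.pyGet? D' x = some (d + 1)))) := by
  intro nbs
  induction nbs with
  | nil =>
    intro node d V D acc hlen _ _
    refine ⟨rfl, ?_⟩
    intro V' D' acc' h
    simp only [nbLoopB, Option.some.injEq, Prod.mk.injEq] at h
    obtain ⟨h1, h2, h3⟩ := h
    subst h1; subst h2; subst h3
    exact ⟨hlen, fun j hj => ⟨hj, rfl⟩, fun x hx => Or.inl hx⟩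
  | cons nb rest ih =>
    intro node d V D acc hlen hVnode hDnode
    simp only [nbLoopA, nbLoopB]
    cases hg : PySem.List.pyGet? V nb with
    | none => exact ⟨rfl, by intro V' D' acc' h; simp at h⟩
    | some b =>
      cases b with
      | true => simpa using ih node d V D acc hlen hVnode hDnode
      | false =>
        simp only [Bool.false_eq_true, if_false]
        cases hset : PySem.List.pySet? V nb true with
        | none => exact ⟨rfl, by intro V' D' acc' h; simp at h⟩
        | some V2 =>
          rw [hDnode]
          dsimp only
          cases hsetD : PySem.List.pySet? D nb (d + 1) with
          | none => exact ⟨rfl, by intro V' D' acc' h; simp at h⟩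
          | some D2 =>
            obtain ⟨hlV, hlD, hV2nb, hD2nb, hmono⟩ := pv_write_pair hlen hg hset hsetD
            have hlen2 : V2.length = D2.length := by rw [hlV, hlD]; exact hlen
            have hVnode2 : PySem.List.pyGet? V2 node = some true := (hmono node hVnode).1
            have hDnode2 : PySem.List.pyGet? D2 node = some d := by
              rw [(hmono node hVnode).2]; exact hDnode
            obtain ⟨heq, hpost⟩ := ih node d V2 D2 (acc ++ [nb]) hlen2 hVnode2 hDnode2
            refine ⟨heq, ?_⟩
            intro V' D' acc' h
            obtain ⟨hlen', hmono', hacc'⟩ := hpost V' D' acc' h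
            refine ⟨hlen', ?_, ?_⟩
            · intro j hj
              obtain ⟨hj2, hjD2⟩ := hmono j hj
              obtain ⟨hj', hjD'⟩ := hmono' j hj2
              exact ⟨hj', by rw [hjD', hjD2]⟩
            · intro x hx
              rcases hacc' x hx with hmem | hfresh
              · rcases List.mem_append.mp hmem with hmem | hmem
                · exact Or.inl hmem
                · have hx_nb : x = nb := by simpa using hmem
                  subst hx_nb
                  obtain ⟨hx', hxD'⟩ := hmono' x hV2nb
                  exact Or.inr ⟨hx', by rw [hxD']; exact hD2nb⟩
              · exact Or.inr hfresh

-- proof-side reshaping of A's loop: processing a whole batch of nodes, discoveries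
-- appended to the pending queue (exactly what nbLoopA does with its acc)
def procA (g : PySem.Dict Int (List Int)) :
    List Int → List Bool → List Int → List Int → Option (List Bool × List Int × List Int)
  | [], V, D, acc => some (V, D, acc)
  | node :: rest, V, D, acc =>
    match nbLoopA node V D acc (g.getD node []) with
    | none => none
    | some (V', D', acc') => procA g rest V' D' acc'

-- a whole batch of A equals the level-sync frontier loop, with the same postconditions
theorem pv_front_eq : ∀ (F : List Int) (g : PySem.Dict Int (List Int)) (d : Int)
    (V : List Bool) (D acc : List Int),
    V.length = D.length →
    (∀ f ∈ F, PySem.List.pyGet? V f = some true ∧ PySem.List.pyGet? D f = some d) →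
    procA g F V D acc = frontLoopB g (d + 1) V D acc F ∧
    (∀ V' D' acc', frontLoopB g (d + 1) V D acc F = some (V', D', acc') →
      V'.length = D'.length ∧
      (∀ j, PySem.List.pyGet? V j = some true →
        PySem.List.pyGet? V' j = some true ∧ PySem.List.pyGet? D' j = PySem.List.pyGet? D j) ∧
      (∀ x ∈ acc', x ∈ acc ∨
        (PySem.List.pyGet? V' x = some true ∧ PySem.List.pyGet? D' x = some (d + 1)))) := by
  intro F
  induction F with
  | nil =>
    intro g d V D acc hlen _
    refine ⟨rfl, ?_⟩
    intro V' D' acc' h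
    simp only [frontLoopB, Option.some.injEq, Prod.mk.injEq] at h
    obtain ⟨h1, h2, h3⟩ := h
    subst h1; subst h2; subst h3
    exact ⟨hlen, fun j hj => ⟨hj, rfl⟩, fun x hx => Or.inl hx⟩
  | cons node rest ih =>
    intro g d V D acc hlen hF
    obtain ⟨hVnode, hDnode⟩ := hF node (by simp)
    obtain ⟨hnb_eq, hnb_post⟩ := pv_nb_eq (g.getD node []) node d V D acc hlen hVnode hDnode
    simp only [procA, frontLoopB, hnb_eq]
    cases hnb : nbLoopB (d + 1) V D acc (g.getD node []) with
    | none => exact ⟨rfl, by intro V' D' acc' h; simp at h⟩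
    | some s =>
      obtain ⟨V1, D1, acc1⟩ := s
      obtain ⟨hlen1, hmono1, hacc1⟩ := hnb_post V1 D1 acc1 hnb
      have hF1 : ∀ f ∈ rest, PySem.List.pyGet? V1 f = some true ∧
          PySem.List.pyGet? D1 f = some d := by
        intro f hf
        obtain ⟨hVf, hDf⟩ := hF f (by simp [hf])
        obtain ⟨hVf1, hDf1⟩ := hmono1 f hVf
        exact ⟨hVf1, by rw [hDf1]; exact hDf⟩
      obtain ⟨heq, hpost⟩ := ih g d V1 D1 acc1 hlen1 hF1
      refine ⟨heq, ?_⟩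
      intro V' D' acc' h
      obtain ⟨hlen', hmono', hacc'⟩ := hpost V' D' acc' h
      refine ⟨hlen', ?_, ?_⟩
      · intro j hj
        obtain ⟨hj1, hjD1⟩ := hmono1 j hj
        obtain ⟨hj', hjD'⟩ := hmono' j hj1
        exact ⟨hj', by rw [hjD', hjD1]⟩
      · intro x hx
        rcases hacc' x hx with hmem | hfresh
        · rcases hacc1 x hmem with hmem1 | hfresh1
          · exact Or.inl hmem1
          · obtain ⟨hx', hxD'⟩ := hmono' x hfresh1.1
            exact Or.inr ⟨hx', by rw [hxD']; exact hfresh1.2⟩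
        · exact Or.inr hfresh

-- nbLoopA only appends to its accumulator: a prefix passes through untouched
theorem pv_nbA_shift : ∀ (nbs : List Int) (node : Int) (V : List Bool) (D a c : List Int),
    nbLoopA node V D (a ++ c) nbs =
      (nbLoopA node V D c nbs).map (fun s => (s.1, s.2.1, a ++ s.2.2)) := by
  intro nbs
  induction nbs with
  | nil => intro node V D a c; rfl
  | cons nb rest ih =>
    intro node V D a c
    simp only [nbLoopA]
    cases hg : PySem.List.pyGet? V nb with
    | none => rfl
    | some b =>
      cases b with
      | true => simpa using ih node V D a c
      | false =>
        simp only [Bool.false_eq_true, if_false]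
        cases hset : PySem.List.pySet? V nb true with
        | none => rfl
        | some V2 =>
          cases hdn : PySem.List.pyGet? D node with
          | none => rfl
          | some dn =>
            dsimp only
            cases hsetD : PySem.List.pySet? D nb (dn + 1) with
            | none => rfl
            | some D2 =>
              rw [List.append_assoc] at *
              simpa [List.append_assoc] using ih node V2 D2 a (c ++ [nb])

-- A's queue loop, decomposed round by round
theorem pv_bfs_round : ∀ (q₁ : List Int) (g : PySem.Dict Int (List Int)) (q₂ : List Int)
    (V : List Bool) (D : List Int),
    bfsLoopA g (q₁ ++ q₂) V D =
      (match procA g q₁ V D q₂ with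
       | none => none
       | some (V', D', q') => bfsLoopA g q' V' D') := by
  intro q₁
  induction q₁ with
  | nil => intro g q₂ V D; rfl
  | cons node t ih =>
    intro g q₂ V D
    have hshift := pv_nbA_shift (g.getD node []) node V D t q₂
    rw [List.cons_append, bfsLoopA, hshift]
    cases hx : nbLoopA node V D q₂ (g.getD node []) with
    | none => simp [procA, hx]
    | some s =>
      obtain ⟨V1, D1, q2'⟩ := s
      simp only [Option.map_some]
      simp only [procA, hx]
      exact ih g q2' V1 D1

-- the queue BFS agrees with the level-sync rounds whenever every frontier node is
-- visited with depth d
theorem pv_main_eq : ∀ (k : Nat) (g : PySem.Dict Int (List Int)) (F : List Int) (d : Int)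
    (V : List Bool) (D : List Int),
    V.count false + F.length ≤ k →
    V.length = D.length →
    (∀ f ∈ F, PySem.List.pyGet? V f = some true ∧ PySem.List.pyGet? D f = some d) →
    bfsLoopA g F V D = roundLoopB g F d V D := by
  intro k
  induction k with
  | zero =>
    intro g F d V D hk _ _
    cases F with
    | nil => simp [bfsLoopA, roundLoopB]
    | cons node rest => simp at hk
  | succ k ih =>
    intro g F d V D hk hlen hF
    cases F with
    | nil => simp [bfsLoopA, roundLoopB]
    | cons node rest =>
      obtain ⟨hfr_eq, hfr_post⟩ := pv_front_eq (node :: rest) g d V D [] hlen hF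
      have h1 : bfsLoopA g (node :: rest) V D = bfsLoopA g ((node :: rest) ++ []) V D := by
        simp
      rw [h1, pv_bfs_round (node :: rest) g [] V D, hfr_eq]
      show _ = roundLoopB g (node :: rest) d V D
      rw [roundLoopB]
      cases hfl : frontLoopB g (d + 1) V D [] (node :: rest) with
      | none => rfl
      | some s =>
        obtain ⟨V', D', F'⟩ := s
        obtain ⟨hlen', _, hacc'⟩ := hfr_post V' D' F' hfl
        have hF' : ∀ f ∈ F', PySem.List.pyGet? V' f = some true ∧
            PySem.List.pyGet? D' f = some (d + 1) := by
          intro f hf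
          rcases hacc' f hf with hmem | hfresh
          · simp at hmem
          · exact hfresh
        have hmeas := frontLoopB_meas (node :: rest) g (d + 1) V D [] V' D' F' hfl
        simp only [List.length_nil] at hmeas
        have hk' : V'.count false + F'.length ≤ k := by
          simp only [List.length_cons] at hk
          omega
        exact ih g F' (d + 1) V' D'
          (by simp only [List.length_cons] at hk; omega) hlen' hF'

-- ---- index helpers ----

theorem pv_idx_of_nonneg {L : Nat} {x : Int} (h0 : 0 ≤ x) (hl : x < (L : Int)) :
    PySem.List.pyIdx? L x = some x.toNat := by
  unfold PySem.List.pyIdx?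
  split_ifs
  all_goals simp_all

theorem pv_set_of_nonneg {α : Type} {xs : List α} {x : Int} (v : α)
    (h0 : 0 ≤ x) (hl : x < (xs.length : Int)) :
    PySem.List.pySet? xs x v = some (xs.set x.toNat v) := by
  simp [PySem.List.pySet?, pv_idx_of_nonneg h0 hl]

theorem pv_get_of_nonneg {α : Type} {xs : List α} {x : Int}
    (h0 : 0 ≤ x) (hl : x < (xs.length : Int)) :
    PySem.List.pyGet? xs x = xs[x.toNat]? := by
  simp [PySem.List.pyGet?, pv_idx_of_nonneg h0 hl]

-- ---- exact effect of one level-sync round on the arrays ----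

theorem pv_nbB_char : ∀ (nbs : List Int) (d : Int) (V : List Bool) (D acc : List Int),
    V.length = D.length →
    (∀ x ∈ nbs, 0 ≤ x ∧ x < (V.length : Int)) →
    ∃ V' D' acc', nbLoopB d V D acc nbs = some (V', D', acc') ∧
      V'.length = V.length ∧ D'.length = D.length ∧
      (∀ x : Int, 0 ≤ x → x < (V.length : Int) →
        (PySem.List.pyGet? V' x = some true ↔ PySem.List.pyGet? V x = some true ∨ x ∈ nbs)) ∧
      (∀ x : Int, 0 ≤ x → x < (V.length : Int) →
        PySem.List.pyGet? D' x =
          (if PySem.List.pyGet? V x = some true ∨ x ∉ nbs then PySem.List.pyGet? D x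
           else some d)) ∧
      (∀ x : Int, x ∈ acc' ↔ x ∈ acc ∨ (x ∈ nbs ∧ PySem.List.pyGet? V x ≠ some true)) := by
  intro nbs
  induction nbs with
  | nil =>
    intro d V D acc hlen _
    exact ⟨V, D, acc, rfl, rfl, rfl, by simp, by intro x _ _; simp, by simp⟩
  | cons nb rest ih =>
    intro d V D acc hlen hran
    obtain ⟨hnb0, hnbL⟩ := hran nb (by simp)
    have hlt : nb.toNat < V.length := by omega
    have hvnb : PySem.List.pyGet? V nb = some V[nb.toNat] := by
      rw [pv_get_of_nonneg hnb0 hnbL, List.getElem?_eq_getElem hlt]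
    cases hb : V[nb.toNat] with
    | true =>
      rw [hb] at hvnb
      obtain ⟨V', D', acc', heq, hl1, hl2, hvc, hdc, hac⟩ :=
        ih d V D acc hlen (fun x hx => hran x (by simp [hx]))
      refine ⟨V', D', acc', ?_, hl1, hl2, ?_, ?_, ?_⟩
      · simp only [nbLoopB, hvnb, if_true]
        exact heq
      · intro x h0 hl
        rw [hvc x h0 hl]
        constructor
        · rintro (h | h)
          · exact Or.inl h
          · exact Or.inr (List.mem_cons_of_mem _ h)
        · rintro (h | h)
          · exact Or.inl h
          · rcases List.mem_cons.mp h with rfl | h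
            · exact Or.inl hvnb
            · exact Or.inr h
      · intro x h0 hl
        rw [hdc x h0 hl]
        have hiff : (PySem.List.pyGet? V x = some true ∨ x ∉ rest) ↔
            (PySem.List.pyGet? V x = some true ∨ x ∉ nb :: rest) := by
          by_cases hx : x = nb
          · subst hx; simp [hvnb]
          · simp [List.mem_cons, hx]
        rw [if_congr hiff rfl rfl]
      · intro x
        rw [hac x]
        have hiff : (x ∈ rest ∧ PySem.List.pyGet? V x ≠ some true) ↔
            (x ∈ nb :: rest ∧ PySem.List.pyGet? V x ≠ some true) := by
          by_cases hx : x = nb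
          · subst hx; simp [hvnb]
          · simp [List.mem_cons, hx]
        rw [hiff]
    | false =>
      rw [hb] at hvnb
      have hset : PySem.List.pySet? V nb true = some (V.set nb.toNat true) :=
        pv_set_of_nonneg true hnb0 hnbL
      have hsetD : PySem.List.pySet? D nb d = some (D.set nb.toNat d) :=
        pv_set_of_nonneg d hnb0 (by rw [← hlen] at *; exact hnbL)
      have hlen2 : (V.set nb.toNat true).length = (D.set nb.toNat d).length := by
        simp [hlen]
      have hv2 : ∀ x : Int, 0 ≤ x → x < (V.length : Int) →
          PySem.List.pyGet? (V.set nb.toNat true) x =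
            (if x = nb then some true else PySem.List.pyGet? V x) := by
        intro x h0 hl
        rw [pv_get_of_nonneg h0 (by simpa using hl), pv_get_of_nonneg h0 hl]
        by_cases hx : x = nb
        · subst hx
          simp [List.getElem?_set_self hlt]
        · have : nb.toNat ≠ x.toNat := by omega
          simp [List.getElem?_set_ne this, hx]
      have hd2 : ∀ x : Int, 0 ≤ x → x < (V.length : Int) →
          PySem.List.pyGet? (D.set nb.toNat d) x =
            (if x = nb then some d else PySem.List.pyGet? D x) := by
        intro x h0 hl
        have hlD : x < ((D.set nb.toNat d).length : Int) := by simp [← hlen, hl]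
        rw [pv_get_of_nonneg h0 hlD, pv_get_of_nonneg h0 (by rw [← hlen] at *; exact hl)]
        by_cases hx : x = nb
        · subst hx
          have hltD : x.toNat < D.length := by omega
          simp [List.getElem?_set_self hltD]
        · have : nb.toNat ≠ x.toNat := by omega
          simp [List.getElem?_set_ne this, hx]
      obtain ⟨V', D', acc', heq, hl1, hl2, hvc, hdc, hac⟩ :=
        ih d (V.set nb.toNat true) (D.set nb.toNat d) (acc ++ [nb]) hlen2
          (by intro x hx
              have := hran x (by simp [hx])
              simpa using this)
      have hlenVs : (V.set nb.toNat true).length = V.length := by simp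
      refine ⟨V', D', acc', ?_, by rw [hl1, hlenVs], by rw [hl2]; simp, ?_, ?_, ?_⟩
      · simp only [nbLoopB, hvnb, Bool.false_eq_true, if_false, hset, hsetD]
        exact heq
      · intro x h0 hl
        rw [hvc x h0 (by simpa using hl), hv2 x h0 hl]
        by_cases hx : x = nb
        · subst hx
          simp [hvnb, List.mem_cons]
        · simp [hx, List.mem_cons]
      · intro x h0 hl
        rw [hdc x h0 (by simpa using hl), hv2 x h0 hl, hd2 x h0 hl]
        by_cases hx : x = nb
        · subst hx
          simp [hvnb, List.mem_cons]
        · simp [hx, List.mem_cons]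
      · intro x
        rw [hac x]
        by_cases hx : x = nb
        · subst hx
          simp only [List.mem_append, List.mem_cons, true_or, true_and]
          simp [hvnb]
        · simp only [List.mem_append, List.mem_cons, hx, false_or]
          by_cases hr : x ∈ rest
          · obtain ⟨hx0, hxL⟩ := hran x (by simp [hr])
            rw [hv2 x hx0 hxL, if_neg hx]
            simp [hr]
          · simp [hr]

theorem pv_frontB_char : ∀ (F : List Int) (g : PySem.Dict Int (List Int)) (d : Int)
    (V : List Bool) (D acc : List Int),
    V.length = D.length →
    (∀ f ∈ F, ∀ x, x ∈ g.getD f [] → 0 ≤ x ∧ x < (V.length : Int)) →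
    ∃ V' D' acc', frontLoopB g d V D acc F = some (V', D', acc') ∧
      V'.length = V.length ∧ D'.length = D.length ∧
      (∀ x : Int, 0 ≤ x → x < (V.length : Int) →
        (PySem.List.pyGet? V' x = some true ↔
          PySem.List.pyGet? V x = some true ∨ ∃ f ∈ F, x ∈ g.getD f [])) ∧
      (∀ x : Int, 0 ≤ x → x < (V.length : Int) →
        PySem.List.pyGet? D' x =
          (if PySem.List.pyGet? V x = some true ∨ ¬ (∃ f ∈ F, x ∈ g.getD f [])
           then PySem.List.pyGet? D x else some d)) ∧
      (∀ x : Int, x ∈ acc' ↔ x ∈ acc ∨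
        ((∃ f ∈ F, x ∈ g.getD f []) ∧ PySem.List.pyGet? V x ≠ some true)) := by
  intro F
  induction F with
  | nil =>
    intro g d V D acc hlen _
    exact ⟨V, D, acc, rfl, rfl, rfl, by simp, by intro x _ _; simp, by simp⟩
  | cons f0 rest ih =>
    intro g d V D acc hlen hadj
    obtain ⟨V1, D1, acc1, heq1, hl1, hl2, hvc1, hdc1, hac1⟩ :=
      pv_nbB_char (g.getD f0 []) d V D acc hlen (fun x hx => hadj f0 (by simp) x hx)
    obtain ⟨V', D', acc', heq2, hl1', hl2', hvc2, hdc2, hac2⟩ :=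
      ih g d V1 D1 acc1 (by rw [hl1, hl2]; exact hlen)
        (by intro f hf x hx
            rw [hl1]
            exact hadj f (List.mem_cons_of_mem _ hf) x hx)
    have hlen1 : (V1.length : Int) = (V.length : Int) := by rw [hl1]
    refine ⟨V', D', acc', ?_, by rw [hl1', hl1], by rw [hl2', hl2], ?_, ?_, ?_⟩
    · simp only [frontLoopB, heq1]
      exact heq2
    · intro x h0 hl
      rw [hvc2 x h0 (by rw [hlen1]; exact hl), hvc1 x h0 hl]
      constructor
      · rintro ((h | h) | ⟨f, hf, hx⟩)
        · exact Or.inl h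
        · exact Or.inr ⟨f0, by simp, h⟩
        · exact Or.inr ⟨f, by simp [hf], hx⟩
      · rintro (h | ⟨f, hf, hx⟩)
        · exact Or.inl (Or.inl h)
        · rcases List.mem_cons.mp hf with rfl | hf
          · exact Or.inl (Or.inr hx)
          · exact Or.inr ⟨f, hf, hx⟩
    · intro x h0 hl
      rw [hdc2 x h0 (by rw [hlen1]; exact hl), hdc1 x h0 hl]
      have hv1' := hvc1 x h0 hl
      by_cases hVx : PySem.List.pyGet? V x = some true
      · rw [if_pos (Or.inl (hv1'.mpr (Or.inl hVx))), if_pos (Or.inl hVx), if_pos (Or.inl hVx)]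
      · by_cases hf0 : x ∈ g.getD f0 []
        · have hv1T : PySem.List.pyGet? V1 x = some true := hv1'.mpr (Or.inr hf0)
          have hcons : ∃ f ∈ f0 :: rest, x ∈ g.getD f [] := ⟨f0, by simp, hf0⟩
          rw [if_pos (Or.inl hv1T), if_neg (by simp [hVx, hf0]),
            if_neg (by simp only [not_or, not_not]; exact ⟨hVx, hcons⟩)]
        · have hv1F : ¬ PySem.List.pyGet? V1 x = some true := by
            intro h
            rcases hv1'.mp h with h | h
            · exact hVx h
            · exact hf0 h
          by_cases hrest : ∃ f ∈ rest, x ∈ g.getD f []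
          · have hcons : ∃ f ∈ f0 :: rest, x ∈ g.getD f [] :=
              ⟨hrest.choose, List.mem_cons_of_mem _ hrest.choose_spec.1, hrest.choose_spec.2⟩
            rw [if_neg (by simp only [not_or, not_not]; exact ⟨hv1F, hrest⟩),
              if_neg (by simp only [not_or, not_not]; exact ⟨hVx, hcons⟩)]
          · have hcons : ¬ ∃ f ∈ f0 :: rest, x ∈ g.getD f [] := by
              rintro ⟨f, hf, hx⟩
              rcases List.mem_cons.mp hf with rfl | hf
              · exact hf0 hx
              · exact hrest ⟨f, hf, hx⟩
            rw [if_pos (Or.inr hrest), if_pos (Or.inr hf0), if_pos (Or.inr hcons)]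
    · intro x
      rw [hac2 x, hac1 x]
      by_cases hf0 : x ∈ g.getD f0 []
      · obtain ⟨hx0, hxL⟩ := hadj f0 (by simp) x hf0
        have hv1 : PySem.List.pyGet? V1 x = some true := (hvc1 x hx0 hxL).mpr (Or.inr hf0)
        have hcons : ∃ f ∈ f0 :: rest, x ∈ g.getD f [] := ⟨f0, by simp, hf0⟩
        simp [hf0, hv1]
      · by_cases hrest : ∃ f ∈ rest, x ∈ g.getD f []
        · obtain ⟨f, hf, hx⟩ := hrest
          obtain ⟨hx0, hxL⟩ := hadj f (List.mem_cons_of_mem _ hf) x hx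
          have hne : (PySem.List.pyGet? V1 x = some true) ↔
              (PySem.List.pyGet? V x = some true) := by
            rw [hvc1 x hx0 hxL]; simp [hf0]
          have hcons : ∃ f ∈ f0 :: rest, x ∈ g.getD f [] :=
            ⟨f, List.mem_cons_of_mem _ hf, hx⟩
          have hrest' : ∃ f ∈ rest, x ∈ g.getD f [] := ⟨f, hf, hx⟩
          simp [hf0, hrest', hne]
        · have hcons : ¬ ∃ f ∈ f0 :: rest, x ∈ g.getD f [] := by
            rintro ⟨f, hf, hx⟩
            rcases List.mem_cons.mp hf with rfl | hf
            · exact hf0 hx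
            · exact hrest ⟨f, hf, hx⟩
          simp [hf0, hrest]

-- ---- the level-sync rounds compute exactly the reachB level structure ----

theorem pv_roundB_final (n : Int) (es : List (Int × Int))
    (hn : 1 ≤ n) (hes : ∀ p ∈ es, pvEdgeOk n es p)
    (g : PySem.Dict Int (List Int))
    (hg : ∀ y x, x ∈ g.getD y [] ↔ ((y, x) ∈ es ∨ (x, y) ∈ es)) :
    ∀ (fuel k : Nat) (V : List Bool) (D : List Int) (F : List Int),
    V.count false + F.length ≤ fuel →
    V.length = D.length →
    V.length = (n + 1).toNat →
    (∀ x : Int, 0 ≤ x → x < (V.length : Int) →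
      (PySem.List.pyGet? V x = some true ↔ reachB es k x = true)) →
    (∀ x : Int, x ∈ F ↔ spx es x k) →
    (∀ x : Int, 0 ≤ x → x < (V.length : Int) → ∀ j : Nat, j ≤ k → spx es x j →
      PySem.List.pyGet? D x = some (j : Int)) →
    (∀ x : Int, 0 ≤ x → x < (V.length : Int) → reachB es k x = false →
      PySem.List.pyGet? D x = some 0) →
    ∃ Df, roundLoopB g F (k : Int) V D = some Df ∧ Df.length = D.length ∧
      (∀ x : Int, 0 ≤ x → x < (V.length : Int) →
        (∀ j : Nat, spx es x j → PySem.List.pyGet? Df x = some (j : Int)) ∧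
        ((∀ m : Nat, reachB es m x = false) → PySem.List.pyGet? Df x = some 0)) := by
  have hfin : ∀ (k : Nat) (V : List Bool) (D : List Int),
      (∀ x : Int, ¬ spx es x k) →
      (∀ x : Int, 0 ≤ x → x < (V.length : Int) → ∀ j : Nat, j ≤ k → spx es x j →
        PySem.List.pyGet? D x = some (j : Int)) →
      (∀ x : Int, 0 ≤ x → x < (V.length : Int) → reachB es k x = false →
        PySem.List.pyGet? D x = some 0) →
      (∀ x : Int, 0 ≤ x → x < (V.length : Int) →
        (∀ j : Nat, spx es x j → PySem.List.pyGet? D x = some (j : Int)) ∧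
        ((∀ m : Nat, reachB es m x = false) → PySem.List.pyGet? D x = some 0)) := by
    intro k V D hempty hI3 hI3b x h0 hl
    constructor
    · intro j hj
      rcases Nat.lt_or_ge j k with hlt | hge
      · exact hI3 x h0 hl j (by omega) hj
      · exact absurd hj (pv_levels_empty hempty j hge x)
    · intro hun
      exact hI3b x h0 hl (hun k)
  intro fuel
  induction fuel with
  | zero =>
    intro k V D F hfuel hlen hlenN hI1 hI2 hI3 hI3b
    cases F with
    | nil =>
      refine ⟨D, by simp [roundLoopB], rfl, ?_⟩
      have hempty : ∀ x : Int, ¬ spx es x k := by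
        intro x hx
        exact absurd ((hI2 x).mpr hx) (List.not_mem_nil)
      exact hfin k V D hempty hI3 hI3b
    | cons f rest => simp at hfuel
  | succ fuel ihf =>
    intro k V D F hfuel hlen hlenN hI1 hI2 hI3 hI3b
    have hlenInt : (V.length : Int) = n + 1 := by
      rw [hlenN]; omega
    cases F with
    | nil =>
      refine ⟨D, by simp [roundLoopB], rfl, ?_⟩
      have hempty : ∀ x : Int, ¬ spx es x k := by
        intro x hx
        exact absurd ((hI2 x).mpr hx) (List.not_mem_nil)
      exact hfin k V D hempty hI3 hI3b
    | cons f rest =>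
      have hadj : ∀ f' ∈ f :: rest, ∀ x : Int, x ∈ g.getD f' [] →
          0 ≤ x ∧ x < (V.length : Int) := by
        intro f' hf' x hx
        have hreachf : reachB es k f' = true := ((hI2 f').mp hf').1
        have hx' : reachB es (k + 1) x = true :=
          pv_reach_step ((hg f' x).mp hx) hreachf
        have hr := pv_reach_in_range hn hes (k + 1) x hx'
        exact ⟨hr.1, by rw [hlenInt]; omega⟩
      obtain ⟨V', D', F', heq, hlV', hlD', hvc, hdc, hac⟩ :=
        pv_frontB_char (f :: rest) g ((k : Int) + 1) V D [] hlen hadj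
      have hstep : roundLoopB g (f :: rest) (k : Int) V D = roundLoopB g F' ((k : Int) + 1) V' D' := by
        rw [roundLoopB, heq]
      -- x reachable at k+1 but not at k has a frontier neighbour, and conversely
      have hfrontier : ∀ x : Int, (∃ f' ∈ f :: rest, x ∈ g.getD f' []) ∧
          PySem.List.pyGet? V x ≠ some true ↔ spx es x (k + 1) := by
        intro x
        constructor
        · rintro ⟨⟨f', hf', hx⟩, hVx⟩
          obtain ⟨hx0, hxL⟩ := hadj f' hf' x hx
          have hsf' : spx es f' k := (hI2 f').mp hf'
          have hr1 : reachB es (k + 1) x = true :=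
            pv_reach_step ((hg f' x).mp hx) hsf'.1
          have hnk : reachB es k x = false := by
            cases hrk : reachB es k x with
            | false => rfl
            | true => exact absurd ((hI1 x hx0 hxL).mpr hrk) hVx
          obtain ⟨j, hjle, hsp⟩ := pv_reach_least hr1
          rcases Nat.lt_or_ge j (k + 1) with hlt | hge
          · exfalso
            have : reachB es k x = true := pv_reach_mono (by omega) hsp.1
            rw [hnk] at this; exact absurd this (by simp)
          · have : j = k + 1 := by omega
            subst this; exact hsp
        · intro hsp
          obtain ⟨y, hy, hedge⟩ := pv_spx_src hsp
          have hxr := pv_reach_in_range hn hes (k + 1) x hsp.1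
          have hx0 : (0 : Int) ≤ x := hxr.1
          have hxL : x < (V.length : Int) := by rw [hlenInt]; omega
          refine ⟨⟨y, (hI2 y).mpr hy, (hg y x).mpr ?_⟩, ?_⟩
          · tauto
          · intro hVx
            have h1 : reachB es k x = true := (hI1 x hx0 hxL).mp hVx
            have h2 : reachB es k x = false := hsp.2 k (by omega)
            rw [h2] at h1
            exact Bool.false_ne_true h1
      have hI1' : ∀ x : Int, 0 ≤ x → x < (V'.length : Int) →
          (PySem.List.pyGet? V' x = some true ↔ reachB es (k + 1) x = true) := by
        intro x h0 hl
        rw [hlV'] at hl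
        rw [hvc x h0 hl]
        constructor
        · rintro (h | ⟨f', hf', hx⟩)
          · exact pv_reach_mono (by omega) ((hI1 x h0 hl).mp h)
          · exact pv_reach_step ((hg f' x).mp hx) ((hI2 f').mp hf').1
        · intro hr
          cases hrk : reachB es k x with
          | true => exact Or.inl ((hI1 x h0 hl).mpr hrk)
          | false =>
            obtain ⟨j, hjle, hsp⟩ := pv_reach_least hr
            have hjk : j = k + 1 := by
              rcases Nat.lt_or_ge j (k + 1) with hlt | hge
              · exfalso
                have h1 : reachB es k x = true := pv_reach_mono (by omega) hsp.1
                rw [hrk] at h1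
                exact Bool.false_ne_true h1
              · omega
            subst hjk
            obtain ⟨⟨f', hf', hx⟩, _⟩ := (hfrontier x).mpr hsp
            exact Or.inr ⟨f', hf', hx⟩
      have hI2' : ∀ x : Int, x ∈ F' ↔ spx es x (k + 1) := by
        intro x
        rw [hac x]
        simp only [List.not_mem_nil, false_or]
        exact hfrontier x
      have hI3' : ∀ x : Int, 0 ≤ x → x < (V'.length : Int) → ∀ j : Nat, j ≤ k + 1 →
          spx es x j → PySem.List.pyGet? D' x = some (j : Int) := by
        intro x h0 hl j hjle hsp
        rw [hlV'] at hl
        rw [hdc x h0 hl]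
        rcases Nat.lt_or_ge j (k + 1) with hlt | hge
        · have hVx : PySem.List.pyGet? V x = some true :=
            (hI1 x h0 hl).mpr (pv_reach_mono (by omega) hsp.1)
          rw [if_pos (Or.inl hVx)]
          exact hI3 x h0 hl j (by omega) hsp
        · have : j = k + 1 := by omega
          subst this
          obtain ⟨hex, hVx⟩ := (hfrontier x).mpr hsp
          rw [if_neg (by simp only [not_or, not_not]; exact ⟨hVx, hex⟩)]
          norm_cast
      have hI3b' : ∀ x : Int, 0 ≤ x → x < (V'.length : Int) → reachB es (k + 1) x = false →
          PySem.List.pyGet? D' x = some 0 := by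
        intro x h0 hl hun
        rw [hlV'] at hl
        rw [hdc x h0 hl]
        have hnk : reachB es k x = false := by
          cases hrk : reachB es k x with
          | false => rfl
          | true =>
            exfalso
            have h1 := pv_reach_mono (Nat.le_succ k) hrk
            rw [hun] at h1
            exact Bool.false_ne_true h1
        have hnoadj : ¬ ∃ f' ∈ f :: rest, x ∈ g.getD f' [] := by
          rintro ⟨f', hf', hx⟩
          have h2 : reachB es (k + 1) x = true :=
            pv_reach_step ((hg f' x).mp hx) ((hI2 f').mp hf').1
          rw [hun] at h2
          exact Bool.false_ne_true h2
        rw [if_pos (Or.inr hnoadj)]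
        exact hI3b x h0 hl hnk
      have hmeas := frontLoopB_meas (f :: rest) g ((k : Int) + 1) V D [] V' D' F' heq
      have hfuel' : V'.count false + F'.length ≤ fuel := by
        simp only [List.length_nil, List.length_cons] at hmeas hfuel
        omega
      have hcast : ((k : Int) + 1) = (((k + 1 : Nat)) : Int) := by push_cast; ring
      obtain ⟨Df, hDf, hDfl, hDfc⟩ :=
        ihf (k + 1) V' D' F' hfuel' (by rw [hlV', hlD']; exact hlen)
          (by rw [hlV']; exact hlenN) hI1' hI2' hI3' hI3b'
      refine ⟨Df, ?_, by rw [hDfl, hlD'], ?_⟩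
      · rw [hstep, hcast]
        exact hDf
      · intro x h0 hl
        exact hDfc x h0 (by rw [hlV']; exact hl)

-- ---- Bellman-Ford side: the relaxation fixpoint computes the same level structure ----

-- order on optional distances (none = "no entry yet" = +infinity)
def pvOle : Option Int → Option Int → Prop
  | _, none => True
  | some a, some b => a ≤ b
  | none, some _ => False

theorem pv_ole_refl (a : Option Int) : pvOle a a := by
  cases a <;> simp [pvOle]

theorem pv_ole_trans {a b c : Option Int} (h1 : pvOle a b) (h2 : pvOle b c) : pvOle a c := by
  cases a <;> cases b <;> cases c <;> simp_all [pvOle]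
  omega

theorem pv_ole_some {a : Option Int} {m : Int} (h : pvOle a (some m)) :
    ∃ k ≤ m, a = some k := by
  cases a with
  | none => exact absurd h (by simp [pvOle])
  | some k => exact ⟨k, h, rfl⟩

-- dict entries only ever decrease
theorem pv_relax_mono (d : PySem.Dict Int Int) (u v w : Int) :
    pvOle ((bfRelax d u v).1.get? w) (d.get? w) := by
  unfold bfRelax
  cases hu : d.get? u with
  | none => exact pv_ole_refl _
  | some du =>
    cases hv : d.get? v with
    | none =>
      dsimp only
      by_cases hw : w = v
      · subst hw
        simp [PySem.Dict.get?_insert_self, hv, pvOle]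
      · rw [PySem.Dict.get?_insert_of_ne _ _ hw]
        exact pv_ole_refl _
    | some dv =>
      dsimp only
      by_cases hlt : du + 1 < dv
      · rw [if_pos hlt]
        by_cases hw : w = v
        · subst hw
          simp [PySem.Dict.get?_insert_self, hv, pvOle]
          omega
        · rw [PySem.Dict.get?_insert_of_ne _ _ hw]
          exact pv_ole_refl _
      · rw [if_neg hlt]
        exact pv_ole_refl _

-- one relaxation guarantees the edge inequality at its target
theorem pv_relax_ub {d : PySem.Dict Int Int} {u : Int} (v : Int) {du : Int}
    (hu : d.get? u = some du) :
    ∃ k ≤ du + 1, (bfRelax d u v).1.get? v = some k := by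
  unfold bfRelax
  rw [hu]
  cases hv : d.get? v with
  | none => exact ⟨du + 1, le_refl _, by simp [PySem.Dict.get?_insert_self]⟩
  | some dv =>
    dsimp only
    by_cases hlt : du + 1 < dv
    · rw [if_pos hlt]
      exact ⟨du + 1, le_refl _, by simp [PySem.Dict.get?_insert_self]⟩
    · rw [if_neg hlt]
      exact ⟨dv, by omega, hv⟩

-- soundness invariant: entry 1 is pinned at 0, every entry is a reachable level bound
def pvInv (es : List (Int × Int)) (d : PySem.Dict Int Int) : Prop :=
  d.get? 1 = some 0 ∧
  ∀ v k, d.get? v = some k → ∃ j : Nat, k = (j : Int) ∧ reachB es j v = true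

theorem pv_relax_inv {es : List (Int × Int)} {d : PySem.Dict Int Int} {u v : Int}
    (hedge : (u, v) ∈ es ∨ (v, u) ∈ es) (hinv : pvInv es d) :
    pvInv es (bfRelax d u v).1 := by
  obtain ⟨h1, hsound⟩ := hinv
  unfold bfRelax
  cases hu : d.get? u with
  | none => exact ⟨h1, hsound⟩
  | some du =>
    obtain ⟨ju, hju, hru⟩ := hsound u du hu
    have hstep : ∀ w k, (d.insert v (du + 1)).get? w = some k →
        ∃ j : Nat, k = (j : Int) ∧ reachB es j w = true := by
      intro w k hw
      by_cases hwv : w = v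
      · subst hwv
        rw [PySem.Dict.get?_insert_self] at hw
        have hk : du + 1 = k := by injection hw
        exact ⟨ju + 1, by omega, pv_reach_step hedge hru⟩
      · rw [PySem.Dict.get?_insert_of_ne _ _ hwv] at hw
        exact hsound w k hw
    cases hv : d.get? v with
    | none =>
      dsimp only
      have hv1 : v ≠ 1 := by
        intro h; subst h; rw [h1] at hv; simp at hv
      refine ⟨?_, hstep⟩
      rw [PySem.Dict.get?_insert_of_ne _ _ (Ne.symm hv1)]
      exact h1
    | some dv =>
      dsimp only
      by_cases hlt : du + 1 < dv
      · rw [if_pos hlt]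
        have hv1 : v ≠ 1 := by
          intro h; subst h; rw [h1] at hv
          have : dv = 0 := by injection hv with h'; omega
          omega
        refine ⟨?_, hstep⟩
        rw [PySem.Dict.get?_insert_of_ne _ _ (Ne.symm hv1)]
        exact h1
      · rw [if_neg hlt]
        exact ⟨h1, hsound⟩

-- flag = false means the relaxation did nothing and the edge inequality already held
theorem pv_relax_flag {d : PySem.Dict Int Int} {u v : Int}
    (h : (bfRelax d u v).2 = false) :
    (bfRelax d u v).1 = d ∧
    (∀ du, d.get? u = some du → ∃ dv ≤ du + 1, d.get? v = some dv) := by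
  unfold bfRelax at *
  cases hu : d.get? u with
  | none => exact ⟨rfl, by intro du h'; simp at h'⟩
  | some du =>
    rw [hu] at h
    cases hv : d.get? v with
    | none => rw [hv] at h; simp at h
    | some dv =>
      rw [hv] at h
      dsimp only at h ⊢
      by_cases hlt : du + 1 < dv
      · rw [if_pos hlt] at h; simp at h
      · rw [if_neg hlt]
        refine ⟨rfl, ?_⟩
        intro du' h'
        have : du = du' := by injection h'
        subst this
        exact ⟨dv, by omega, rfl⟩

-- the fold step of bfPass
def bfStep (s : PySem.Dict Int Int × Bool) (p : Int × Int) : PySem.Dict Int Int × Bool :=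
  let r1 := bfRelax s.1 p.1 p.2
  let r2 := bfRelax r1.1 p.2 p.1
  (r2.1, s.2 || r1.2 || r2.2)

theorem pv_bfPass_eq (es : List (Int × Int)) (d : PySem.Dict Int Int) :
    bfPass es d = es.foldl bfStep (d, false) := rfl

theorem pv_fold_mono : ∀ (l : List (Int × Int)) (d : PySem.Dict Int Int) (c : Bool) (w : Int),
    pvOle ((l.foldl bfStep (d, c)).1.get? w) (d.get? w) := by
  intro l
  induction l with
  | nil => intro d c w; exact pv_ole_refl _
  | cons e rest ih =>
    intro d c w
    simp only [List.foldl_cons]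
    refine pv_ole_trans (ih _ _ w) ?_
    exact pv_ole_trans (pv_relax_mono _ e.2 e.1 w) (pv_relax_mono _ e.1 e.2 w)

theorem pv_fold_inv {es : List (Int × Int)} :
    ∀ (l : List (Int × Int)) (d : PySem.Dict Int Int) (c : Bool),
    (∀ e ∈ l, e ∈ es) → pvInv es d → pvInv es (l.foldl bfStep (d, c)).1 := by
  intro l
  induction l with
  | nil => intro d c _ hinv; exact hinv
  | cons e rest ih =>
    intro d c hsub hinv
    simp only [List.foldl_cons]
    refine ih _ _ (fun e' he' => hsub e' (List.mem_cons_of_mem _ he')) ?_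
    have he : e ∈ es := hsub e (by simp)
    have h1 : pvInv es (bfRelax d e.1 e.2).1 := pv_relax_inv (Or.inl he) hinv
    exact pv_relax_inv (Or.inr he) h1

theorem pv_fold_ub : ∀ (l : List (Int × Int)) (d : PySem.Dict Int Int) (c : Bool)
    (u v : Int), ((u, v) ∈ l ∨ (v, u) ∈ l) → ∀ k, d.get? u = some k →
    ∃ k' ≤ k + 1, (l.foldl bfStep (d, c)).1.get? v = some k' := by
  intro l
  induction l with
  | nil =>
    intro d c u v hedge k _
    rcases hedge with h | h <;> exact absurd h (List.not_mem_nil)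
  | cons e rest ih =>
    intro d c u v hedge k hk
    simp only [List.foldl_cons]
    by_cases hhead : e = (u, v) ∨ e = (v, u)
    · -- the head edge already establishes the bound; later steps only decrease
      have hafter : ∃ k' ≤ k + 1, (bfStep (d, c) e).1.get? v = some k' := by
        rcases hhead with rfl | rfl
        · -- e = (u, v): the first relax does it
          obtain ⟨k1, hk1, hget1⟩ := pv_relax_ub v hk
          have hm2 : pvOle ((bfRelax (bfRelax d u v).1 v u).1.get? v) (some k1) := by
            rw [← hget1]
            exact pv_relax_mono (bfRelax d u v).1 v u v
          obtain ⟨k2, hk2, hget2⟩ := pv_ole_some hm2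
          exact ⟨k2, by omega, hget2⟩
        · -- e = (v, u): the second relax does it, from u's value after the first
          have hm0 : pvOle ((bfRelax d v u).1.get? u) (some k) := by
            rw [← hk]
            exact pv_relax_mono d v u u
          obtain ⟨k0, hk0, hget0⟩ := pv_ole_some hm0
          obtain ⟨k1, hk1, hget1⟩ := pv_relax_ub (d := (bfRelax d v u).1) v hget0
          exact ⟨k1, by omega, hget1⟩
      obtain ⟨k', hk', hget'⟩ := hafter
      have hm3 : pvOle ((rest.foldl bfStep (bfStep (d, c) e)).1.get? v)
          ((bfStep (d, c) e).1.get? v) := pv_fold_mono rest _ _ v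
      rw [hget'] at hm3
      obtain ⟨k'', hk'', hget''⟩ := pv_ole_some hm3
      exact ⟨k'', by omega, hget''⟩
    · have hrest : (u, v) ∈ rest ∨ (v, u) ∈ rest := by
        rcases hedge with h | h
        · rcases List.mem_cons.mp h with h' | h'
          · exact absurd (Or.inl h'.symm) hhead
          · exact Or.inl h'
        · rcases List.mem_cons.mp h with h' | h'
          · exact absurd (Or.inr h'.symm) hhead
          · exact Or.inr h'
      have hmono : pvOle ((bfStep (d, c) e).1.get? u) (some k) := by
        rw [← hk]
        exact pv_ole_trans (pv_relax_mono _ e.2 e.1 u) (pv_relax_mono _ e.1 e.2 u)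
      obtain ⟨k0, hk0, hget0⟩ := pv_ole_some hmono
      obtain ⟨k', hk', hget'⟩ := ih (bfStep (d, c) e).1 (bfStep (d, c) e).2 u v hrest k0 hget0
      exact ⟨k', by omega, hget'⟩

-- a pass whose flag comes back false changed nothing and certifies the fixpoint inequalities
theorem pv_fold_flag : ∀ (l : List (Int × Int)) (d : PySem.Dict Int Int) (c : Bool),
    (l.foldl bfStep (d, c)).2 = false →
    c = false ∧ (l.foldl bfStep (d, c)).1 = d ∧
    ∀ e ∈ l, (∀ du, d.get? e.1 = some du → ∃ dv ≤ du + 1, d.get? e.2 = some dv) ∧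
      (∀ du, d.get? e.2 = some du → ∃ dv ≤ du + 1, d.get? e.1 = some dv) := by
  intro l
  induction l with
  | nil =>
    intro d c h
    exact ⟨h, rfl, by intro e he; exact absurd he (List.not_mem_nil)⟩
  | cons e rest ih =>
    intro d c h
    simp only [List.foldl_cons] at h ⊢
    obtain ⟨hc2, hrest_eq, hrest_fix⟩ := ih (bfStep (d, c) e).1 (bfStep (d, c) e).2 h
    have hflags : c = false ∧ (bfRelax d e.1 e.2).2 = false ∧
        (bfRelax (bfRelax d e.1 e.2).1 e.2 e.1).2 = false := by
      have heq2 : (bfStep (d, c) e).2 =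
          (c || (bfRelax d e.1 e.2).2 || (bfRelax (bfRelax d e.1 e.2).1 e.2 e.1).2) := rfl
      rw [heq2] at hc2
      simp only [Bool.or_eq_false_iff] at hc2
      exact ⟨hc2.1.1, hc2.1.2, hc2.2⟩
    obtain ⟨hc, hf1, hf2⟩ := hflags
    obtain ⟨hd1, hfix1⟩ := pv_relax_flag hf1
    have hf2' : (bfRelax d e.2 e.1).2 = false := by rw [hd1] at hf2; exact hf2
    obtain ⟨hd2, hfix2⟩ := pv_relax_flag hf2'
    have hstep_eq : (bfStep (d, c) e).1 = d := by
      have : (bfStep (d, c) e).1 = (bfRelax (bfRelax d e.1 e.2).1 e.2 e.1).1 := rfl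
      rw [this, hd1, hd2]
    refine ⟨hc, by rw [hrest_eq, hstep_eq], ?_⟩
    intro e' he'
    rcases List.mem_cons.mp he' with rfl | he'
    · exact ⟨hfix1, hfix2⟩
    · have := hrest_fix e' he'
      rw [hstep_eq] at this
      exact this

-- at a fixpoint, every entry is exactly its level
theorem pv_fix_char {es : List (Int × Int)} {d : PySem.Dict Int Int}
    (hinv : pvInv es d)
    (hfix : ∀ e ∈ es, (∀ du, d.get? e.1 = some du → ∃ dv ≤ du + 1, d.get? e.2 = some dv) ∧
      (∀ du, d.get? e.2 = some du → ∃ dv ≤ du + 1, d.get? e.1 = some dv)) :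
    ∀ j (v : Int), spx es v j → d.get? v = some (j : Int) := by
  intro j
  induction j using Nat.strong_induction_on with
  | _ j ihj =>
    intro v hsp
    cases j with
    | zero =>
      have hv1 : v = 1 := by
        have := hsp.1
        simpa [reachB] using this
      subst hv1
      exact hinv.1
    | succ j =>
      obtain ⟨y, hy, hedge⟩ := pv_spx_src hsp
      have hdy : d.get? y = some (j : Int) := ihj j (by omega) y hy
      have hv_ub : ∃ dv ≤ (j : Int) + 1, d.get? v = some dv := by
        rcases hedge with h | h
        · exact (hfix (y, v) h).1 (j : Int) hdy
        · exact (hfix (v, y) h).2 (j : Int) hdy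
      obtain ⟨dv, hdvle, hdv⟩ := hv_ub
      obtain ⟨j', hj', hrj'⟩ := hinv.2 v dv hdv
      have hge : j + 1 ≤ j' := by
        by_contra hlt
        have h1 : reachB es j' v = false := hsp.2 j' (by omega)
        rw [h1] at hrj'
        exact Bool.false_ne_true hrj'
      have : dv = ((j + 1 : Nat) : Int) := by
        subst hj'
        push_cast
        push_cast at hdvle
        omega
      rw [this] at hdv
      exact hdv

-- the per-pass upper bound: after pass t + 1 every level ≤ t + 1 entry is in place
theorem pv_pass_upto {es : List (Int × Int)} {d : PySem.Dict Int Int} {t : Nat}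
    (hup : ∀ (v : Int) (j : Nat), spx es v j → j ≤ t → ∃ k ≤ (j : Int), d.get? v = some k) :
    ∀ (v : Int) (j : Nat), spx es v j → j ≤ t + 1 →
      ∃ k ≤ (j : Int), (bfPass es d).1.get? v = some k := by
  intro v j hsp hle
  rcases Nat.lt_or_ge j (t + 1) with hlt | hge
  · obtain ⟨k, hk, hget⟩ := hup v j hsp (by omega)
    have hm : pvOle ((bfPass es d).1.get? v) (some k) := by
      rw [← hget, pv_bfPass_eq]
      exact pv_fold_mono es d false v
    obtain ⟨k', hk', hget'⟩ := pv_ole_some hm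
    exact ⟨k', by omega, hget'⟩
  · have hj : j = t + 1 := by omega
    subst hj
    obtain ⟨y, hy, hedge⟩ := pv_spx_src hsp
    obtain ⟨k, hk, hget⟩ := hup y t hy (le_refl t)
    rw [pv_bfPass_eq]
    obtain ⟨k', hk', hget'⟩ := pv_fold_ub es d false y v hedge k hget
    refine ⟨k', ?_, hget'⟩
    omega

-- the round loop of Source B: invariant + bound ⇒ exact levels in the result
theorem pv_rounds_char {es : List (Int × Int)} :
    ∀ (fuel t : Nat) (d : PySem.Dict Int Int),
    pvInv es d →
    (∀ (v : Int) (j : Nat), spx es v j → j ≤ t → ∃ k ≤ (j : Int), d.get? v = some k) →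
    pvInv es (bfRounds es fuel d) ∧
    (∀ (v : Int) (j : Nat), spx es v j → j ≤ t + fuel →
      (bfRounds es fuel d).get? v = some (j : Int)) := by
  intro fuel
  induction fuel with
  | zero =>
    intro t d hinv hup
    refine ⟨hinv, ?_⟩
    intro v j hsp hle
    obtain ⟨k, hk, hget⟩ := hup v j hsp (by omega)
    obtain ⟨j', hj', hrj'⟩ := hinv.2 v k hget
    have hge : (j : Int) ≤ k := by
      subst hj'
      have : j ≤ j' := by
        by_contra hlt
        have h1 : reachB es j' v = false := hsp.2 j' (by omega)
        rw [h1] at hrj'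
        exact Bool.false_ne_true hrj'
      omega
    have : k = (j : Int) := by omega
    rw [this] at hget
    exact hget
  | succ fuel ihf =>
    intro t d hinv hup
    have hred : bfRounds es (fuel + 1) d =
        (if (bfPass es d).2 then bfRounds es fuel (bfPass es d).1 else (bfPass es d).1) := rfl
    cases hflag : (bfPass es d).2 with
    | true =>
      rw [hflag] at hred
      simp only [if_true] at hred
      have hinv' : pvInv es (bfPass es d).1 := by
        rw [pv_bfPass_eq]
        exact pv_fold_inv es d false (fun e he => he) hinv
      have hup' := pv_pass_upto hup
      obtain ⟨hinv'', hchar⟩ := ihf (t + 1) (bfPass es d).1 hinv' hup'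
      rw [hred]
      refine ⟨hinv'', ?_⟩
      intro v j hsp hle
      exact hchar v j hsp (by omega)
    | false =>
      rw [hflag] at hred
      simp only [Bool.false_eq_true, if_false] at hred
      have hfl := hflag
      rw [pv_bfPass_eq] at hfl
      obtain ⟨_, heq, hfix⟩ := pv_fold_flag es d false hfl
      have hpass_eq : (bfPass es d).1 = d := by rw [pv_bfPass_eq]; exact heq
      rw [hred, hpass_eq]
      refine ⟨hinv, ?_⟩
      intro v j hsp _
      exact pv_fix_char hinv hfix j v hsp

-- Python's `1 if t % 2 == 1 else 0` is `t % 2` (the modulus is 0 or 1)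
theorem pv_mod_two (t : Int) :
    (if PySem.Int.mod t 2 = 1 then (1 : Int) else 0) = PySem.Int.mod t 2 := by
  have h1 : 0 ≤ PySem.Int.mod t 2 := PySem.Int.mod_nonneg t (by norm_num)
  have h2 : PySem.Int.mod t 2 < 2 := PySem.Int.mod_lt t (by norm_num)
  split_ifs with h <;> omega

-- the two leaf-scan folds agree pointwise, hence produce the same total
theorem pv_sum_eq : ∀ (xs : List Int) (Df : List Int) (dist : PySem.Dict Int Int)
    (gA : PySem.Dict Int (List Int)) (dg : PySem.Dict Int Int) (t : Int),
    (∀ v ∈ xs, ((gA.getD v []).length = 1 ↔ dg.getD v 0 = 1) ∧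
      PySem.List.pyGet? Df v = some (dist.getD v 0)) →
    xs.foldl (fun acc node => acc.bind (fun tt =>
        if (gA.getD node []).length = 1 then
          (PySem.List.pyGet? Df node).map (fun dv => tt + dv)
        else some tt)) (some t)
    = some (xs.foldl (fun tt node =>
        if dg.getD node 0 = 1 then tt + dist.getD node 0 else tt) t) := by
  intro xs
  induction xs with
  | nil => intro Df dist gA dg t _; rfl
  | cons v rest ih =>
    intro Df dist gA dg t hpt
    obtain ⟨hguard, hval⟩ := hpt v (by simp)
    simp only [List.foldl_cons, Option.bind_some]
    by_cases h1 : (gA.getD v []).length = 1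
    · rw [if_pos h1, if_pos (hguard.mp h1), hval]
      simp only [Option.map_some]
      exact ih Df dist gA dg _ (fun w hw => hpt w (by simp [hw]))
    · rw [if_neg h1, if_neg (fun h => h1 (hguard.mpr h))]
      exact ih Df dist gA dg _ (fun w hw => hpt w (by simp [hw]))

theorem pv_ports_eq (n : Int) (edges : List (Int × Int)) (hpre : Pre_can_a_win n edges) :
    can_a_win n edges = can_a_win_alt n edges := by
  obtain ⟨hn, hes⟩ := hpre
  have hNval : (((n + 1).toNat : Nat) : Int) = n + 1 := by omega
  -- the shared adjacency dict of A
  have hg : ∀ y x : Int,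
      x ∈ (edges.foldl (fun g p =>
        (g.modify p.1 [] (fun l => l ++ [p.2])).modify p.2 [] (fun l => l ++ [p.1]))
        PySem.Dict.empty).getD y [] ↔ ((y, x) ∈ edges ∨ (x, y) ∈ edges) :=
    fun y x => pv_adj_mem edges y x
  -- initial arrays
  have hV0 : PySem.List.pyRepeat [false] (n + 1) = List.replicate (n + 1).toNat false :=
    PySem.List.pyRepeat_singleton _ _
  have hD0 : PySem.List.pyRepeat [(0 : Int)] (n + 1) = List.replicate (n + 1).toNat (0 : Int) :=
    PySem.List.pyRepeat_singleton _ _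
  have hlenV0 : ((List.replicate (n + 1).toNat false).length : Int) = n + 1 := by
    simp [hNval]
  have hset : PySem.List.pySet? (List.replicate (n + 1).toNat false) 1 true
      = some ((List.replicate (n + 1).toNat false).set 1 true) := by
    have := pv_set_of_nonneg (xs := List.replicate (n + 1).toNat false) true
      (x := 1) (by norm_num) (by rw [hlenV0]; omega)
    simpa using this
  have hlenV1 : ((List.replicate (n + 1).toNat false).set 1 true).length = (n + 1).toNat := by
    simp
  have h1lt : 1 < (n + 1).toNat := by omega
  -- initial invariants (round 0: visited = {1}, frontier = [1], depths all 0)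
  have hI1 : ∀ x : Int, 0 ≤ x →
      x < ((((List.replicate (n + 1).toNat false).set 1 true).length : Nat) : Int) →
      (PySem.List.pyGet? ((List.replicate (n + 1).toNat false).set 1 true) x = some true ↔
        reachB edges 0 x = true) := by
    intro x h0 hl
    rw [hlenV1] at hl
    rw [pv_get_of_nonneg h0 (by rw [hlenV1]; exact_mod_cast hl)]
    by_cases hx : x = 1
    · subst hx
      have : ((1 : Int).toNat) = 1 := rfl
      rw [this, List.getElem?_set_self (by simpa using h1lt)]
      simp [reachB]
    · have hne : (1 : Nat) ≠ x.toNat := by omega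
      rw [List.getElem?_set_ne hne]
      have hxlt : x.toNat < (n + 1).toNat := by omega
      rw [List.getElem?_replicate_of_lt hxlt]
      simp [reachB, hx]
  have hI2 : ∀ x : Int, x ∈ [(1 : Int)] ↔ spx edges x 0 := by
    intro x
    simp only [List.mem_singleton, spx, reachB]
    constructor
    · rintro rfl
      exact ⟨by simp, by omega⟩
    · rintro ⟨h, _⟩
      simpa using h
  have hD0get : ∀ x : Int, 0 ≤ x →
      x < ((((List.replicate (n + 1).toNat false).set 1 true).length : Nat) : Int) →
      PySem.List.pyGet? (List.replicate (n + 1).toNat (0 : Int)) x = some 0 := by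
    intro x h0 hl
    rw [hlenV1] at hl
    rw [pv_get_of_nonneg h0 (by simp [hNval]; omega)]
    have hxlt : x.toNat < (n + 1).toNat := by omega
    rw [List.getElem?_replicate_of_lt hxlt]
  have hI3 : ∀ x : Int, 0 ≤ x →
      x < ((((List.replicate (n + 1).toNat false).set 1 true).length : Nat) : Int) →
      ∀ j : Nat, j ≤ 0 → spx edges x j →
      PySem.List.pyGet? (List.replicate (n + 1).toNat (0 : Int)) x = some (j : Int) := by
    intro x h0 hl j hj _
    have : j = 0 := by omega
    subst this
    simpa using hD0get x h0 hl
  have hI3b : ∀ x : Int, 0 ≤ x →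
      x < ((((List.replicate (n + 1).toNat false).set 1 true).length : Nat) : Int) →
      reachB edges 0 x = false →
      PySem.List.pyGet? (List.replicate (n + 1).toNat (0 : Int)) x = some 0 := by
    intro x h0 hl _
    exact hD0get x h0 hl
  obtain ⟨Df, hDf, hDfl, hDfc⟩ :=
    pv_roundB_final n edges hn hes _ hg
      (((List.replicate (n + 1).toNat false).set 1 true).count false + 1) 0
      ((List.replicate (n + 1).toNat false).set 1 true)
      (List.replicate (n + 1).toNat (0 : Int)) [(1 : Int)]
      (by simp) (by simp [hlenV1]) (by rw [hlenV1]) hI1 hI2 hI3 hI3b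
  -- A's queue BFS equals the level-sync rounds
  have hV1get1 : PySem.List.pyGet? ((List.replicate (n + 1).toNat false).set 1 true) 1
      = some true := by
    rw [pv_get_of_nonneg (by norm_num) (by rw [hlenV1]; rw [hNval]; omega)]
    have : ((1 : Int).toNat) = 1 := rfl
    rw [this, List.getElem?_set_self (by simpa using h1lt)]
  have hbfs : bfsLoopA
      (edges.foldl (fun g p =>
        (g.modify p.1 [] (fun l => l ++ [p.2])).modify p.2 [] (fun l => l ++ [p.1]))
        PySem.Dict.empty) [1]
      ((List.replicate (n + 1).toNat false).set 1 true)
      (List.replicate (n + 1).toNat (0 : Int))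
      = roundLoopB
      (edges.foldl (fun g p =>
        (g.modify p.1 [] (fun l => l ++ [p.2])).modify p.2 [] (fun l => l ++ [p.1]))
        PySem.Dict.empty) [1] 0
      ((List.replicate (n + 1).toNat false).set 1 true)
      (List.replicate (n + 1).toNat (0 : Int)) := by
    apply pv_main_eq (((List.replicate (n + 1).toNat false).set 1 true).count false + 1)
    · simp
    · simp [hlenV1]
    · intro f hf
      have hf1 : f = 1 := by simpa using hf
      subst hf1
      exact ⟨hV1get1, by
        have := hD0get 1 (by norm_num) (by rw [hlenV1]; rw [hNval]; omega)
        simpa using this⟩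
  -- B's distance dict
  have hinv0 : pvInv edges ((PySem.Dict.empty).insert 1 (0 : Int)) := by
    constructor
    · simp [PySem.Dict.get?_insert_self]
    · intro v k hv
      by_cases hv1 : v = 1
      · subst hv1
        rw [PySem.Dict.get?_insert_self] at hv
        have : (0 : Int) = k := by injection hv
        exact ⟨0, by omega, by simp [reachB]⟩
      · rw [PySem.Dict.get?_insert_of_ne _ _ hv1, PySem.Dict.get?_empty] at hv
        exact absurd hv (by simp)
  have hup0 : ∀ (v : Int) (j : Nat), spx edges v j → j ≤ 0 →
      ∃ k ≤ (j : Int), ((PySem.Dict.empty).insert 1 (0 : Int)).get? v = some k := by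
    intro v j hsp hj
    have : j = 0 := by omega
    subst this
    have hv1 : v = 1 := by
      have := hsp.1
      simpa [reachB] using this
    subst hv1
    exact ⟨0, by omega, by simp [PySem.Dict.get?_insert_self]⟩
  obtain ⟨hinvF, hcharF⟩ :=
    pv_rounds_char (es := edges) n.toNat 0 ((PySem.Dict.empty).insert 1 (0 : Int)) hinv0 hup0
  -- pointwise agreement of the two leaf scans
  have hpt : ∀ v ∈ PySem.List.pyRange 2 (n + 1) 1,
      (((edges.foldl (fun g p =>
          (g.modify p.1 [] (fun l => l ++ [p.2])).modify p.2 [] (fun l => l ++ [p.1]))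
          PySem.Dict.empty).getD v []).length = 1 ↔
        (edges.foldl (fun d p =>
          let d1 := d.insert p.1 (d.getD p.1 0 + 1)
          d1.insert p.2 (d1.getD p.2 0 + 1))
          (PySem.Dict.empty : PySem.Dict Int Int)).getD v 0 = (1 : Int)) ∧
      PySem.List.pyGet? Df v =
        some ((bfRounds edges n.toNat ((PySem.Dict.empty).insert 1 (0 : Int))).getD v 0) := by
    intro v hv
    have hvb : 2 ≤ v ∧ v < n + 1 := (PySem.List.mem_pyRange_one).mp hv
    have hv0 : (0 : Int) ≤ v := by omega
    have hvL : v < ((((List.replicate (n + 1).toNat false).set 1 true).length : Nat) : Int) := by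
      rw [hlenV1, hNval]; omega
    constructor
    · have hiff :
        ((((edges.foldl (fun g p =>
          (g.modify p.1 [] (fun l => l ++ [p.2])).modify p.2 [] (fun l => l ++ [p.1]))
          PySem.Dict.empty).getD v []).length = 1) ↔
        ((edges.foldl (fun d p =>
            (d.insert p.1 (d.getD p.1 0 + 1)).insert p.2
              ((d.insert p.1 (d.getD p.1 0 + 1)).getD p.2 0 + 1))
            (PySem.Dict.empty : PySem.Dict Int Int)).getD v 0 = (1 : Int))) := by
        rw [pv_deg_eq edges v]
        omega
      exact hiff
    · cases hreach : reachB edges n.toNat v with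
      | true =>
        obtain ⟨j, hjle, hsp⟩ := pv_reach_least hreach
        have hDfv : PySem.List.pyGet? Df v = some (j : Int) := (hDfc v hv0 hvL).1 j hsp
        have hdist : (bfRounds edges n.toNat ((PySem.Dict.empty).insert 1 (0 : Int))).get? v
            = some (j : Int) := hcharF v j hsp (by omega)
        simp [hDfv, PySem.Dict.getD_eq_get?_getD, hdist]
      | false =>
        have hall : ∀ m : Nat, reachB edges m v = false := by
          intro m
          cases hm : reachB edges m v with
          | false => rfl
          | true =>
            exfalso
            obtain ⟨j, hjle, hsp⟩ := pv_reach_least hm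
            have hjN : j ≤ n.toNat := pv_sp_bound hn hes v j hsp
            have := pv_reach_mono hjN hsp.1
            rw [hreach] at this
            exact Bool.false_ne_true this
        have hDfv : PySem.List.pyGet? Df v = some 0 := (hDfc v hv0 hvL).2 hall
        have hdist : (bfRounds edges n.toNat ((PySem.Dict.empty).insert 1 (0 : Int))).get? v
            = none := by
          cases hd : (bfRounds edges n.toNat ((PySem.Dict.empty).insert 1 (0 : Int))).get? v with
          | none => rfl
          | some k =>
            exfalso
            obtain ⟨j, hj, hrj⟩ := hinvF.2 v k hd
            rw [hall j] at hrj
            exact Bool.false_ne_true hrj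
        simp [hDfv, PySem.Dict.getD_eq_get?_getD, hdist]
  -- assemble both programs
  simp only [can_a_win, can_a_win_alt]
  rw [hV0, hD0, hset]
  dsimp only
  rw [hbfs]
  simp only [Nat.cast_zero] at hDf
  rw [hDf]
  dsimp only
  rw [pv_sum_eq _ Df _ _ _ 0 hpt]
  dsimp only
  exact pv_mod_two _

-- ===== VERDICT (by name: the statement is the Claim_ definition above) =====
theorem can_a_win_spec : Claim_equal_can_a_win := by
  intro n edges _ hpre
  unfold Spec_can_a_win
  exact pv_ports_eq n edges hpre
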